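-- pv_equiv track=rewrite | github.com/AshrafulSamiun/Coding-Interview | Graph/doomsday_eskap.py | doomsday_escape
-- ===== SOURCE A (Python) =====
-- from collections import deque
--
-- def doomsday_escape(n, m, doom_time):
--     # Direction vectors: up, down, left, right
--     directions = [(-1,0), (1,0), (0,-1), (0,1)]
--     visited = [[False]*m for _ in range(n)]
--
--     # Start BFS from (0, 0) at time 0
--     queue = deque([(0, 0, 0)])  # (i, j, time)
--     visited[0][0] = True
--
--     while queue:
--         x, y, t = queue.popleft()
--
--         if x == n - 1 and y == m - 1:
--             return "YES"
--
--         for dx, dy in directions: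
--             nx, ny = x + dx, y + dy
--             nt = t + 1
--             if 0 <= nx < n and 0 <= ny < m:
--                 if not visited[nx][ny] and nt < doom_time[nx][ny]:
--                     visited[nx][ny] = True
--                     queue.append((nx, ny, nt))
--
--     return "NO"
-- ===== SOURCE B (Python) =====
-- def doomsday_escape(n, m, doom_time):
--     # Fixpoint saturation: no queue/frontier; each time step rebuilds the whole
--     # reachability matrix from the previous one until the exit is reached or
--     # the matrix stops changing.
--     if n == 1 and m == 1:
--         return "YES"
--
--     def grows(reached, t, i, j):
--         # cell (i, j) becomes reachable at time t from an already-reached neighbour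
--         return (not reached[i][j]) and (
--             (i > 0 and reached[i - 1][j]) or (i + 1 < n and reached[i + 1][j]) or
--             (j > 0 and reached[i][j - 1]) or (j + 1 < m and reached[i][j + 1])
--         ) and t < doom_time[i][j]
--
--     reached = [[i == 0 and j == 0 for j in range(m)] for i in range(n)]
--     t = 0
--     while True:
--         t += 1
--         new = [[reached[i][j] or grows(reached, t, i, j) for j in range(m)]
--                for i in range(n)]
--         if new[n - 1][m - 1]:
--             return "YES"
--         if new == reached:
--             return "NO"
--         reached = new
-- ===== Notes on version B (the rewrite author's own statement) =====
-- stated objective: alternative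
-- what changed: Replaces the worklist BFS (deque of cells with stored times, expanding only neighbours of popped cells) by queue-free fixpoint iteration: each time step rebuilds the entire n*m reachability matrix from the previous one by scanning every grid cell, stopping when the exit is reached or the matrix is stable.
-- outside the precondition, e.g. on doomsday_escape(4, 1, [[5], [9], [1]]): A returns 'NO', B returns 'NO'; on doomsday_escape(3, 1, [[5], [9]]): A raises IndexError, B raises IndexError
import Mathlib
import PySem

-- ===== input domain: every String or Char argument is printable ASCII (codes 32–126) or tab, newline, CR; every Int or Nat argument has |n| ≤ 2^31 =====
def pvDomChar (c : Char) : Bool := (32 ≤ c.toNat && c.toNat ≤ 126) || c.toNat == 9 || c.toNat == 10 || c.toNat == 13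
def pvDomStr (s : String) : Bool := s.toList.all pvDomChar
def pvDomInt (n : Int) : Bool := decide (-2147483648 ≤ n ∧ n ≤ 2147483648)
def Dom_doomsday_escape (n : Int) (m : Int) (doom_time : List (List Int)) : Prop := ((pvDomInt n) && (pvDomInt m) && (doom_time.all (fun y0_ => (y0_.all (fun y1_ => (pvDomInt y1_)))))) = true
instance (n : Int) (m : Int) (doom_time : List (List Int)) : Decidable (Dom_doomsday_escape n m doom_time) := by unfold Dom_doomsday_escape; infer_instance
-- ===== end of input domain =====

-- B replaces A's deque BFS by queue-free fixpoint saturation: each time step rebuilds the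
-- whole n×m reachability matrix from the previous one until the exit is reached or the
-- matrix is stable; the return value is identical on every input admitted by Pre_doomsday_escape.

-- ===== PORT A =====
-- grid read: visited[i][j] / doom_time[i][j].  Called only under the in-bounds guard
-- (0 ≤ i < n, 0 ≤ j < m) and Pre_ guarantees an n×m grid, so the defaults are never
-- reached on admitted inputs; they only make the function total.
def gget (g : List (List Bool)) (i j : Int) : Bool :=
  if 0 ≤ i ∧ 0 ≤ j then ((g[i.toNat]?.getD [])[j.toNat]?).getD true else true

def dget (g : List (List Int)) (i j : Int) : Int :=
  if 0 ≤ i ∧ 0 ≤ j then ((g[i.toNat]?.getD [])[j.toNat]?).getD 0 else 0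

-- grid write: visited[i][j] = True (identity when out of range, which Pre_ rules out)
def gset (g : List (List Bool)) (i j : Int) : List (List Bool) :=
  if 0 ≤ i ∧ 0 ≤ j then g.set i.toNat ((g[i.toNat]?.getD []).set j.toNat true) else g

-- number of False cells, the termination measure of A's while-loop
def cntF (g : List (List Bool)) : Nat := (g.map (fun r => r.count false)).sum

def dirsA : List (Int × Int) := [(-1, 0), (1, 0), (0, -1), (0, 1)]

-- the body of A's 'for dx, dy in directions' loop, one direction at a time
def fA (n m : Int) (doom : List (List Int)) (t x y : Int)
    (st : List (List Bool) × List (Int × Int × Int)) (d : Int × Int) :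
    List (List Bool) × List (Int × Int × Int) :=
  let nx := x + d.1
  let ny := y + d.2
  let nt := t + 1
  if 0 ≤ nx ∧ nx < n ∧ 0 ≤ ny ∧ ny < m then
    if gget st.1 nx ny = false ∧ nt < dget doom nx ny then
      (gset st.1 nx ny, st.2 ++ [(nx, ny, nt)])
    else st
  else st

theorem fA_def (n m : Int) (doom : List (List Int)) (t x y : Int)
    (st : List (List Bool) × List (Int × Int × Int)) (d : Int × Int) :
    fA n m doom t x y st d
      = if 0 ≤ x + d.1 ∧ x + d.1 < n ∧ 0 ≤ y + d.2 ∧ y + d.2 < m then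
          if gget st.1 (x + d.1) (y + d.2) = false
              ∧ t + 1 < dget doom (x + d.1) (y + d.2) then
            (gset st.1 (x + d.1) (y + d.2), st.2 ++ [(x + d.1, y + d.2, t + 1)])
          else st
        else st := rfl

-- the whole 'for dx, dy in directions' loop: updated grid + entries appended to the queue
def stepA (n m : Int) (doom : List (List Int)) (t x y : Int) (v : List (List Bool)) :
    List (List Bool) × List (Int × Int × Int) :=
  dirsA.foldl (fA n m doom t x y) (v, [])

theorem foldl_mu_le {α β : Type} (μ : α → Nat) (f : α → β → α)
    (h : ∀ st d, μ (f st d) ≤ μ st) :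
    ∀ (l : List β) (st : α), μ (l.foldl f st) ≤ μ st := by
  intro l
  induction l with
  | nil => intro st; exact Nat.le_refl _
  | cons d ds ih => intro st; exact Nat.le_trans (ih (f st d)) (h st d)

theorem count_set_false (row : List Bool) (j : Nat) (h : row[j]? = some false) :
    (row.set j true).count false + 1 = row.count false := by
  induction row generalizing j with
  | nil => simp at h
  | cons a l ih =>
    cases j with
    | zero =>
      simp at h
      simp [h]
    | succ k =>
      simp at h
      simp [List.set, List.count_cons, ← ih k h]
      omega

theorem cntF_set (g : List (List Bool)) (k : Nat) (row : List Bool) (r' : List Bool)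
    (h : g[k]? = some row) :
    cntF (g.set k r') + row.count false = cntF g + r'.count false := by
  induction g generalizing k with
  | nil => simp at h
  | cons a l ih =>
    cases k with
    | zero => simp at h; subst h; simp [cntF]; omega
    | succ k' =>
      simp at h
      have := ih k' h
      simp [cntF] at this ⊢
      omega

theorem cntF_gset_lt (g : List (List Bool)) (i j : Int) (h : gget g i j = false) :
    cntF (gset g i j) < cntF g := by
  unfold gget at h
  split at h
  · rename_i hij
    unfold gset
    rw [if_pos hij]
    cases hrow : g[i.toNat]? with
    | none => simp [hrow] at h
    | some row =>
      rw [hrow] at h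
      simp only [Option.getD_some] at h
      cases hcell : row[j.toNat]? with
      | none => simp [hcell] at h
      | some b =>
        rw [hcell] at h
        simp at h
        subst h
        have h1 := count_set_false row j.toNat hcell
        have h2 := cntF_set g i.toNat row (row.set j.toNat true) hrow
        simp
        omega
  · simp at h

theorem fA_mu (n m : Int) (doom : List (List Int)) (t x y : Int)
    (st : List (List Bool) × List (Int × Int × Int)) (d : Int × Int) :
    cntF (fA n m doom t x y st d).1 + (fA n m doom t x y st d).2.length
      ≤ cntF st.1 + st.2.length := by
  rw [fA_def]
  split
  · split
    · rename_i hc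
      have h := cntF_gset_lt st.1 (x + d.1) (y + d.2) hc.1
      simp only [List.length_append, List.length_cons, List.length_nil]
      omega
    · exact Nat.le_refl _
  · exact Nat.le_refl _

theorem stepA_measure (n m : Int) (doom : List (List Int)) (t x y : Int)
    (v : List (List Bool)) :
    cntF (stepA n m doom t x y v).1 + (stepA n m doom t x y v).2.length ≤ cntF v := by
  have h := foldl_mu_le (fun st => cntF st.1 + st.2.length) (fA n m doom t x y)
    (fA_mu n m doom t x y) dirsA (v, [])
  simpa using h

theorem loopA_dec (n m : Int) (doom : List (List Int)) (t x y : Int)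
    (v : List (List Bool)) (q : List (Int × Int × Int)) :
    cntF (stepA n m doom t x y v).1 + (q ++ (stepA n m doom t x y v).2).length
      < cntF v + ((x, y, t) :: q).length := by
  have h := stepA_measure n m doom t x y v
  simp only [List.length_append, List.length_cons]
  omega

-- the while-loop: pop from the front, return "YES" when the target is popped
def loopA (n m : Int) (doom : List (List Int)) :
    List (List Bool) → List (Int × Int × Int) → String
  | _, [] => "NO"
  | v, (x, y, t) :: q =>
    if x = n - 1 ∧ y = m - 1 then "YES"
    else
      let st := stepA n m doom t x y v
      loopA n m doom st.1 (q ++ st.2)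
  termination_by v q => cntF v + q.length
  decreasing_by
    exact loopA_dec n m doom t x y v q

def doomsday_escape (n : Int) (m : Int) (doom_time : List (List Int)) : String :=
  let visited := gset (List.replicate n.toNat (List.replicate m.toNat false)) 0 0
  loopA n m doom_time visited [(0, 0, 0)]

-- ===== PORT B =====
-- grid read with default False: reached[i][j]; B only reads in-range cells (guards /
-- construction), the default only makes the function total.
def bget (g : List (List Bool)) (i j : Nat) : Bool :=
  ((g[i]?.getD [])[j]?).getD false

-- the helper 'grows': cell (i, j) becomes reachable at time t from a reached neighbour
def growsB (n m : Int) (doom : List (List Int)) (reached : List (List Bool))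
    (t : Int) (i j : Nat) : Bool :=
  !(bget reached i j) &&
    ((decide (0 < i) && bget reached (i - 1) j) ||
     (decide (((i : Nat) : Int) + 1 < n) && bget reached (i + 1) j) ||
     (decide (0 < j) && bget reached i (j - 1)) ||
     (decide (((j : Nat) : Int) + 1 < m) && bget reached i (j + 1))) &&
    decide (t < dget doom ((i : Nat) : Int) ((j : Nat) : Int))

-- 'new = [[reached[i][j] or grows(...) for j in range(m)] for i in range(n)]'
def sweepC (n m : Int) (doom : List (List Int)) (reached : List (List Bool))
    (t : Int) : List (List Bool) :=
  (List.range n.toNat).map (fun i =>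
    (List.range m.toNat).map (fun j => bget reached i j || growsB n m doom reached t i j))

-- 'reached = [[i == 0 and j == 0 for j in range(m)] for i in range(n)]'
def reached0 (n m : Int) : List (List Bool) :=
  (List.range n.toNat).map (fun i =>
    (List.range m.toNat).map (fun j => decide (i = 0) && decide (j = 0)))

-- termination machinery for B's while-loop: count of unreached rectangle cells
def rectCells (n m : Int) : List (Nat × Nat) :=
  (List.range n.toNat).flatMap (fun i => (List.range m.toNat).map (fun j => (i, j)))

def rectFalse (n m : Int) (g : List (List Bool)) : Nat :=
  ((rectCells n m).filter (fun c => !(bget g c.1 c.2))).length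

def shapedB (n m : Int) (g : List (List Bool)) : Bool :=
  (g.length == n.toNat) && g.all (fun r => r.length == m.toNat)

theorem bget_sweepC (n m : Int) (doom : List (List Int)) (g : List (List Bool))
    (t : Int) (i j : Nat) :
    bget (sweepC n m doom g t) i j
      = if i < n.toNat ∧ j < m.toNat
          then bget g i j || growsB n m doom g t i j else false := by
  unfold sweepC
  show (((List.map _ (List.range n.toNat))[i]?.getD [])[j]?).getD false = _
  by_cases hi : i < n.toNat
  · rw [List.getElem?_map, List.getElem?_range hi]
    by_cases hj : j < m.toNat
    · rw [if_pos ⟨hi, hj⟩]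
      simp only [Option.map_some, Option.getD_some, List.getElem?_map,
        List.getElem?_range hj]
    · rw [if_neg (by tauto)]
      simp only [Option.map_some, Option.getD_some]
      rw [List.getElem?_eq_none_iff.mpr (by rw [List.length_map, List.length_range]; omega)]
      rfl
  · rw [if_neg (by tauto)]
    have hnone : ∀ (f : Nat → List Bool), ((List.range n.toNat).map f)[i]? = none := by
      intro f
      rw [List.getElem?_eq_none_iff, List.length_map, List.length_range]
      omega
    rw [hnone]
    rfl

theorem mem_rectCells (n m : Int) (c : Nat × Nat) :
    c ∈ rectCells n m ↔ c.1 < n.toNat ∧ c.2 < m.toNat := by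
  unfold rectCells
  cases c with
  | mk i j =>
    simp [List.mem_flatMap, Prod.ext_iff]

theorem filter_length_mono {α : Type} (l : List α) (p q : α → Bool)
    (h : ∀ a ∈ l, q a = true → p a = true) :
    (l.filter q).length ≤ (l.filter p).length := by
  induction l with
  | nil => simp
  | cons a l ih =>
    have ih' := ih (fun a ha => h a (List.mem_cons_of_mem _ ha))
    by_cases hq : q a = true
    · rw [List.filter_cons_of_pos hq, List.filter_cons_of_pos (h a (List.mem_cons_self) hq)]
      simpa using ih'
    · rw [List.filter_cons_of_neg (by simpa using hq)]
      cases hp : p a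
      · rw [List.filter_cons_of_neg (by simp [hp])]; exact ih'
      · rw [List.filter_cons_of_pos (by simp [hp])]
        exact Nat.le_succ_of_le ih'

theorem filter_length_strict {α : Type} (l : List α) (p q : α → Bool) (a : α)
    (ha : a ∈ l) (hpa : p a = true) (hqa : q a = false)
    (h : ∀ b ∈ l, q b = true → p b = true) :
    (l.filter q).length < (l.filter p).length := by
  induction l with
  | nil => simp at ha
  | cons x l ih =>
    have h' : ∀ b ∈ l, q b = true → p b = true := fun b hb => h b (List.mem_cons_of_mem _ hb)
    rcases List.mem_cons.mp ha with rfl | hal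
    · rw [List.filter_cons_of_pos hpa, List.filter_cons_of_neg (by simp [hqa])]
      exact Nat.lt_succ_of_le (filter_length_mono l p q h')
    · have ih' := ih hal h'
      by_cases hq : q x = true
      · rw [List.filter_cons_of_pos hq, List.filter_cons_of_pos (h x List.mem_cons_self hq)]
        simpa using ih'
      · rw [List.filter_cons_of_neg (by simpa using hq)]
        cases hp : p x
        · rw [List.filter_cons_of_neg (by simp [hp])]; exact ih'
        · rw [List.filter_cons_of_pos (by simp [hp])]
          exact Nat.lt_succ_of_lt ih'

theorem rectFalse_sweepC_le (n m : Int) (doom : List (List Int))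
    (g : List (List Bool)) (t : Int) :
    rectFalse n m (sweepC n m doom g t) ≤ rectFalse n m g := by
  apply filter_length_mono
  intro c hc hq
  have hrc := (mem_rectCells n m c).mp hc
  rw [bget_sweepC, if_pos hrc] at hq
  simp only [Bool.not_eq_eq_eq_not, Bool.not_true, Bool.or_eq_false_iff] at hq
  simp [hq.1]

theorem shapedB_sweepC (n m : Int) (doom : List (List Int)) (g : List (List Bool))
    (t : Int) : shapedB n m (sweepC n m doom g t) = true := by
  unfold shapedB sweepC
  simp [List.all_eq_true]

theorem bget_getElem (g : List (List Bool)) (i j : Nat) (hi : i < g.length)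
    (hj : j < g[i].length) : bget g i j = g[i][j] := by
  unfold bget
  rw [List.getElem?_eq_getElem hi]
  simp [List.getElem?_eq_getElem hj]

theorem sweepC_ne_exists (n m : Int) (doom : List (List Int)) (g : List (List Bool))
    (t : Int) (hs : shapedB n m g = true) (hne : sweepC n m doom g t ≠ g) :
    ∃ c ∈ rectCells n m, bget g c.1 c.2 = false
      ∧ bget (sweepC n m doom g t) c.1 c.2 = true := by
  by_contra hall
  push_neg at hall
  apply hne
  unfold shapedB at hs
  simp [List.all_eq_true] at hs
  obtain ⟨hlen, hrows⟩ := hs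
  have hlen' : (sweepC n m doom g t).length = g.length := by
    simp [sweepC, hlen]
  apply List.ext_getElem hlen'
  intro i h1 h2
  have hi : i < n.toNat := by
    rw [hlen'] at h1; omega
  have hrl : g[i].length = m.toNat := hrows _ (g.getElem_mem h2)
  have hrl2 : (sweepC n m doom g t)[i].length = m.toNat := by
    simp [sweepC]
  apply List.ext_getElem (by rw [hrl, hrl2])
  intro j hj1 hj2
  have hjm : j < m.toNat := by rw [hrl2] at hj1; omega
  have e1 : bget (sweepC n m doom g t) i j = (sweepC n m doom g t)[i][j] :=
    bget_getElem _ i j h1 hj1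
  have e2 : bget g i j = g[i][j] := bget_getElem _ i j h2 hj2
  have hmem : ((i, j) : Nat × Nat) ∈ rectCells n m := (mem_rectCells n m _).mpr ⟨hi, hjm⟩
  have hcell := hall (i, j) hmem
  rw [← e1, ← e2]
  have hb := bget_sweepC n m doom g t i j
  rw [if_pos ⟨hi, hjm⟩] at hb
  cases hgv : bget g i j with
  | true => rw [hb, hgv]; simp
  | false =>
    cases hnv : bget (sweepC n m doom g t) i j with
    | false => rfl
    | true => exact absurd hnv (hcell hgv)

theorem rectFalse_sweepC_lt (n m : Int) (doom : List (List Int)) (g : List (List Bool))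
    (t : Int) (hs : shapedB n m g = true) (hne : sweepC n m doom g t ≠ g) :
    rectFalse n m (sweepC n m doom g t) < rectFalse n m g := by
  obtain ⟨c, hc, hold, hnew⟩ := sweepC_ne_exists n m doom g t hs hne
  apply filter_length_strict _ _ _ c hc (by simp [hold]) (by simp [hnew])
  intro b hb hq
  have hrc := (mem_rectCells n m b).mp hb
  rw [bget_sweepC, if_pos hrc] at hq
  simp only [Bool.not_eq_eq_eq_not, Bool.not_true, Bool.or_eq_false_iff] at hq
  simp [hq.1]

-- B's while-loop: sweep, test the exit, test for a fixpoint, iterate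
def loopC (n m : Int) (doom : List (List Int)) : List (List Bool) → Int → String
  | reached, t =>
    let new := sweepC n m doom reached (t + 1)
    if bget new (n - 1).toNat (m - 1).toNat then "YES"
    else if new = reached then "NO"
    else loopC n m doom new (t + 1)
  termination_by reached _t =>
    2 * rectFalse n m reached + (if shapedB n m reached = true then 0 else 1)
  decreasing_by
    rename_i hne
    by_cases hs : shapedB n m reached = true
    · have h1 := rectFalse_sweepC_lt n m doom reached (t + 1) hs hne
      have h2 := shapedB_sweepC n m doom reached (t + 1)
      simp [hs, h2]
      omega
    · have h1 := rectFalse_sweepC_le n m doom reached (t + 1)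
      have h2 := shapedB_sweepC n m doom reached (t + 1)
      simp [hs, h2]
      omega

def doomsday_escape_alt (n : Int) (m : Int) (doom_time : List (List Int)) : String :=
  if n = 1 ∧ m = 1 then "YES"
  else loopC n m doom_time (reached0 n m) 0

-- ===== PRECONDITION & SPEC =====
-- Pre_ admits n, m ≥ 1 together with the closed-form cases in which neither Python
-- reads a missing doom cell: a 1×1 grid (immediate YES, nothing read), a full n×m doom
-- grid, or a grid whose two start neighbours are present and block every move (both
-- programs then return NO after reading only those).  For n ≤ 0 or m ≤ 0 both Pythons
-- raise IndexError at once.  Pre_ also excludes deeper partial grids on which A happens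
-- to return because its BFS stops before the first missing cell: how far the BFS reaches
-- is not a closed-form condition on the input.
def Pre_doomsday_escape (n : Int) (m : Int) (doom_time : List (List Int)) : Prop :=
  1 ≤ n ∧ 1 ≤ m ∧
    ((n = 1 ∧ m = 1)
     ∨ (n.toNat ≤ doom_time.length ∧ ∀ row ∈ doom_time.take n.toNat, m.toNat ≤ row.length)
     ∨ ((n ≤ 1 ∨ (((doom_time[1]?.getD [])[0]?).getD 2) ≤ 1)
        ∧ (m ≤ 1 ∨ (((doom_time[0]?.getD [])[1]?).getD 2) ≤ 1)))

instance (n : Int) (m : Int) (doom_time : List (List Int)) :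
    Decidable (Pre_doomsday_escape n m doom_time) := by
  unfold Pre_doomsday_escape; infer_instance

def pvWitness_doomsday_escape : Int × Int × List (List Int) := (2, 2, [[5, 5], [5, 5]])

def Spec_doomsday_escape (n : Int) (m : Int) (doom_time : List (List Int)) (out : String) : Prop := out = doomsday_escape_alt n m doom_time
instance (n : Int) (m : Int) (doom_time : List (List Int)) (out : String) : Decidable (Spec_doomsday_escape n m doom_time out) := by unfold Spec_doomsday_escape; infer_instance

-- ===== CLAIM (what is proved, stated in full; the proofs are below) =====
def Claim_equal_doomsday_escape : Prop := ∀ (n : Int) (m : Int) (doom_time : List (List Int)), Dom_doomsday_escape n m doom_time → Pre_doomsday_escape n m doom_time → Spec_doomsday_escape n m doom_time (doomsday_escape n m doom_time)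

-- ===== LEMMAS AND PROOFS =====

-- Proof-side intermediate program: a level-synchronous frontier BFS.  A is first shown
-- equal to it (deque → layers), and it is then shown equal to B's saturation sweep.
def fB (n m : Int) (doom : List (List Int)) (target : Int × Int) (t : Int)
    (st : PySem.Set (Int × Int) × List (Int × Int) × Bool) (c : Int × Int) :
    PySem.Set (Int × Int) × List (Int × Int) × Bool :=
  if st.2.2 then st
  else if 0 ≤ c.1 ∧ c.1 < n ∧ 0 ≤ c.2 ∧ c.2 < m then
    if PySem.Set.contains st.1 c = false ∧ t + 1 < dget doom c.1 c.2 then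
      if c = target then (st.1, st.2.1, true)
      else (PySem.Set.add st.1 c, st.2.1 ++ [c], st.2.2)
    else st
  else st

theorem fB_def (n m : Int) (doom : List (List Int)) (target : Int × Int) (t : Int)
    (st : PySem.Set (Int × Int) × List (Int × Int) × Bool) (c : Int × Int) :
    fB n m doom target t st c
      = if st.2.2 then st
        else if 0 ≤ c.1 ∧ c.1 < n ∧ 0 ≤ c.2 ∧ c.2 < m then
          if PySem.Set.contains st.1 c = false ∧ t + 1 < dget doom c.1 c.2 then
            if c = target then (st.1, st.2.1, true)
            else (PySem.Set.add st.1 c, st.2.1 ++ [c], st.2.2)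
          else st
        else st := rfl

def stepB (n m : Int) (doom : List (List Int)) (target : Int × Int) (t x y : Int)
    (st : PySem.Set (Int × Int) × List (Int × Int) × Bool) :
    PySem.Set (Int × Int) × List (Int × Int) × Bool :=
  [(x - 1, y), (x + 1, y), (x, y - 1), (x, y + 1)].foldl (fB n m doom target t) st

def freeCnt (n m : Int) (s : PySem.Set (Int × Int)) : Nat :=
  ((((List.range n.toNat).map Int.ofNat).flatMap (fun i =>
    ((List.range m.toNat).map Int.ofNat).map (fun j => (i, j)))).filter
      (fun c => !(PySem.Set.contains s c))).length

theorem freeCnt_add_lt (n m : Int) (s : PySem.Set (Int × Int)) (c : Int × Int)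
    (hb : 0 ≤ c.1 ∧ c.1 < n ∧ 0 ≤ c.2 ∧ c.2 < m)
    (hc : PySem.Set.contains s c = false) :
    freeCnt n m (PySem.Set.add s c) < freeCnt n m s := by
  unfold freeCnt
  obtain ⟨h1, h2, h3, h4⟩ := hb
  have hcnot : c ∉ s := fun hm => by
    rw [(PySem.Set.contains_iff _ _).mpr hm] at hc; cases hc
  have hmem : c ∈ PySem.Set.add s c := by rw [PySem.Set.mem_add]; right; rfl
  apply filter_length_strict _ _ _ c
  · have ha1 : c.1.toNat < n.toNat := by omega
    have ha2 : c.2.toNat < m.toNat := by omega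
    have e1 : Int.ofNat c.1.toNat = c.1 := Int.toNat_of_nonneg h1
    have e2 : Int.ofNat c.2.toNat = c.2 := Int.toNat_of_nonneg h3
    refine List.mem_flatMap.mpr ⟨c.1, List.mem_map.mpr ⟨c.1.toNat, List.mem_range.mpr ha1, e1⟩,
      List.mem_map.mpr ⟨c.2, List.mem_map.mpr ⟨c.2.toNat, List.mem_range.mpr ha2, e2⟩, rfl⟩⟩
  · show (!(PySem.Set.contains s c)) = true
    rw [hc]; rfl
  · show (!(PySem.Set.contains (PySem.Set.add s c) c)) = false
    rw [(PySem.Set.contains_iff _ _).mpr hmem]; rfl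
  · intro b _ hq
    show (!(PySem.Set.contains s b)) = true
    have hq' : PySem.Set.contains (PySem.Set.add s c) b = false := by
      simpa using hq
    by_contra hcon
    have hb' : b ∈ s := (PySem.Set.contains_iff _ _).mp (by simpa using hcon)
    have hm2 : b ∈ PySem.Set.add s c := by rw [PySem.Set.mem_add]; left; exact hb'
    rw [(PySem.Set.contains_iff _ _).mpr hm2] at hq'
    cases hq'

theorem fB_mu (n m : Int) (doom : List (List Int)) (target : Int × Int) (t : Int)
    (st : PySem.Set (Int × Int) × List (Int × Int) × Bool) (c : Int × Int) :
    freeCnt n m (fB n m doom target t st c).1 + (fB n m doom target t st c).2.1.length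
      ≤ freeCnt n m st.1 + st.2.1.length := by
  rw [fB_def]
  split
  · exact Nat.le_refl _
  · split
    · rename_i hb
      split
      · rename_i hc
        split
        · exact Nat.le_refl _
        · have h := freeCnt_add_lt n m st.1 c hb hc.1
          simp only [List.length_append, List.length_cons, List.length_nil]
          omega
      · exact Nat.le_refl _
    · exact Nat.le_refl _

theorem stepB_measure (n m : Int) (doom : List (List Int)) (target : Int × Int)
    (t x y : Int) (st : PySem.Set (Int × Int) × List (Int × Int) × Bool) :
    freeCnt n m (stepB n m doom target t x y st).1
      + (stepB n m doom target t x y st).2.1.length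
    ≤ freeCnt n m st.1 + st.2.1.length :=
  foldl_mu_le (fun st => freeCnt n m st.1 + st.2.1.length) (fB n m doom target t)
    (fB_mu n m doom target t) _ st

theorem loopB_measure (n m : Int) (doom : List (List Int)) (target : Int × Int)
    (t : Int) (F : List (Int × Int))
    (st : PySem.Set (Int × Int) × List (Int × Int) × Bool) :
    freeCnt n m (F.foldl (fun st c => stepB n m doom target t c.1 c.2 st) st).1
      + (F.foldl (fun st c => stepB n m doom target t c.1 c.2 st) st).2.1.length
    ≤ freeCnt n m st.1 + st.2.1.length :=
  foldl_mu_le (fun st => freeCnt n m st.1 + st.2.1.length)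
    (fun st c => stepB n m doom target t c.1 c.2 st)
    (fun st c => stepB_measure n m doom target t c.1 c.2 st) F st

theorem loopB_dec (n m : Int) (doom : List (List Int)) (target : Int × Int)
    (visited : PySem.Set (Int × Int)) (f : Int × Int) (fs : List (Int × Int)) (t : Int) :
    freeCnt n m ((f :: fs).foldl (fun st c => stepB n m doom target t c.1 c.2 st)
        (visited, ([], false))).1
      + ((f :: fs).foldl (fun st c => stepB n m doom target t c.1 c.2 st)
        (visited, ([], false))).2.1.length
      < freeCnt n m visited + (f :: fs).length := by
  have h := loopB_measure n m doom target t (f :: fs) (visited, ([], false))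
  simp at h ⊢
  omega

def loopB (n m : Int) (doom : List (List Int)) (target : Int × Int) :
    PySem.Set (Int × Int) → List (Int × Int) → Int → String
  | _, [], _ => "NO"
  | visited, f :: fs, t =>
    let st := (f :: fs).foldl (fun st c => stepB n m doom target t c.1 c.2 st)
      (visited, ([], false))
    if st.2.2 then "YES"
    else loopB n m doom target st.1 st.2.1 (t + 1)
  termination_by visited frontier _t => freeCnt n m visited + frontier.length
  decreasing_by
    exact loopB_dec n m doom target visited f fs t

-- ---- A (deque) = loopB (layers): simulation, unchanged from the deque analysis ----
def ShapeG (n m : Int) (v : List (List Bool)) : Prop :=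
  v.length = n.toNat ∧ ∀ r ∈ v, r.length = m.toNat

def CorrG (n m : Int) (v : List (List Bool)) (S : PySem.Set (Int × Int)) : Prop :=
  ∀ x y : Int, 0 ≤ x → x < n → 0 ≤ y → y < m →
    gget v x y = PySem.Set.contains S (x, y)

theorem stepB_eq (n m : Int) (doom : List (List Int)) (target : Int × Int)
    (t x y : Int) (st : PySem.Set (Int × Int) × List (Int × Int) × Bool) :
    stepB n m doom target t x y st
      = dirsA.foldl (fun st d => fB n m doom target t st (x + d.1, y + d.2)) st := by
  have h : [(x - 1, y), (x + 1, y), (x, y - 1), (x, y + 1)]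
      = dirsA.map (fun d => (x + d.1, y + d.2)) := by
    simp [dirsA]
    constructor <;> omega
  rw [stepB, h, List.foldl_map]

theorem gset_shape (n m : Int) (v : List (List Bool)) (a b : Int)
    (h : ShapeG n m v) : ShapeG n m (gset v a b) := by
  obtain ⟨h1, h2⟩ := h
  unfold gset
  split
  · by_cases hlt : a.toNat < v.length
    · have hrow : v[a.toNat]? = some v[a.toNat] := List.getElem?_eq_getElem hlt
      refine ⟨by simpa using h1, ?_⟩
      intro r hr
      rcases List.mem_or_eq_of_mem_set hr with hmem | rfl
      · exact h2 r hmem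
      · rw [hrow]
        simpa using h2 _ (v.getElem_mem hlt)
    · rw [List.set_eq_of_length_le (by omega)]
      exact ⟨h1, h2⟩
  · exact ⟨h1, h2⟩

theorem gget_gset (n m : Int) (v : List (List Bool)) (a b x y : Int)
    (hS : ShapeG n m v)
    (ha : 0 ≤ a) (ha' : a < n) (hb : 0 ≤ b) (hb' : b < m)
    (hx : 0 ≤ x) (hx' : x < n) (hy : 0 ≤ y) (hy' : y < m) :
    gget (gset v a b) x y = if x = a ∧ y = b then true else gget v x y := by
  obtain ⟨hlen, hrows⟩ := hS
  have haN : a.toNat < v.length := by omega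
  have hrow : v[a.toNat]? = some v[a.toNat] := List.getElem?_eq_getElem haN
  have hrlen : v[a.toNat].length = m.toNat := hrows _ (v.getElem_mem haN)
  have e1 : gget (gset v a b) x y
      = (((gset v a b)[x.toNat]?.getD [])[y.toNat]?).getD true := by
    unfold gget; rw [if_pos ⟨hx, hy⟩]
  have e2 : gget v x y = ((v[x.toNat]?.getD [])[y.toNat]?).getD true := by
    unfold gget; rw [if_pos ⟨hx, hy⟩]
  have e3 : gset v a b = v.set a.toNat ((v[a.toNat]?.getD []).set b.toNat true) := by
    unfold gset; rw [if_pos ⟨ha, hb⟩]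
  rw [e1, e2, e3, hrow]
  simp only [Option.getD_some]
  by_cases hxa : x = a
  · subst hxa
    rw [List.getElem?_set_self (by omega)]
    simp only [Option.getD_some]
    by_cases hyb : y = b
    · subst hyb
      rw [List.getElem?_set_self (by omega)]
      simp
    · have hne : b.toNat ≠ y.toNat := by omega
      rw [if_neg (by tauto), List.getElem?_set_ne hne, hrow]
      simp
  · have hne : a.toNat ≠ x.toNat := by omega
    rw [List.getElem?_set_ne hne, if_neg (by tauto)]

theorem contains_add_self {s : PySem.Set (Int × Int)} (c : Int × Int) :
    PySem.Set.contains (PySem.Set.add s c) c = true :=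
  (PySem.Set.contains_iff _ _).mpr (by rw [PySem.Set.mem_add]; right; rfl)

theorem contains_add_ne {s : PySem.Set (Int × Int)} (c z : Int × Int) (h : z ≠ c) :
    PySem.Set.contains (PySem.Set.add s c) z = PySem.Set.contains s z := by
  cases hz : PySem.Set.contains s z with
  | true =>
    exact (PySem.Set.contains_iff _ _).mpr
      (by rw [PySem.Set.mem_add]; left; exact (PySem.Set.contains_iff _ _).mp hz)
  | false =>
    cases hz2 : PySem.Set.contains (PySem.Set.add s c) z with
    | false => rfl
    | true =>
      have := (PySem.Set.contains_iff _ _).mp hz2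
      rw [PySem.Set.mem_add] at this
      rcases this with hm | rfl
      · rw [(PySem.Set.contains_iff _ _).mpr hm] at hz; cases hz
      · exact absurd rfl h

theorem fA_acc_mono (n m : Int) (doom : List (List Int)) (t x y : Int) :
    ∀ (dirs : List (Int × Int)) (v : List (List Bool)) (acc : List (Int × Int × Int))
      (e : Int × Int × Int), e ∈ acc → e ∈ (dirs.foldl (fA n m doom t x y) (v, acc)).2 := by
  intro dirs
  induction dirs with
  | nil => intro v acc e he; simpa using he
  | cons d ds ih =>
    intro v acc e he
    simp only [List.foldl_cons, fA_def]
    split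
    · split
      · exact ih _ _ e (by simp [he])
      · exact ih _ _ e he
    · exact ih _ _ e he

theorem stepB_frozen (n m : Int) (doom : List (List Int)) (target : Int × Int)
    (t x y : Int) (S : PySem.Set (Int × Int)) (acc : List (Int × Int)) :
    stepB n m doom target t x y (S, acc, true) = (S, acc, true) := by
  rw [stepB_eq]
  have h : ∀ (ds : List (Int × Int)),
      ds.foldl (fun st d => fB n m doom target t st (x + d.1, y + d.2)) (S, acc, true)
        = (S, acc, true) := by
    intro ds
    induction ds with
    | nil => rfl
    | cons d dd ih => simpa using ih
  exact h dirsA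

theorem layerB_frozen (n m : Int) (doom : List (List Int)) (target : Int × Int)
    (t : Int) :
    ∀ (F : List (Int × Int)) (S : PySem.Set (Int × Int)) (acc : List (Int × Int)),
      F.foldl (fun st c => stepB n m doom target t c.1 c.2 st) (S, acc, true)
        = (S, acc, true) := by
  intro F
  induction F with
  | nil => intro S acc; rfl
  | cons c cs ih =>
    intro S acc
    simp only [List.foldl_cons, stepB_frozen]
    exact ih S acc

def runA (n m : Int) (doom : List (List Int)) (t x y : Int) (dirs : List (Int × Int))
    (v : List (List Bool)) (accA : List (Int × Int × Int)) :
    List (List Bool) × List (Int × Int × Int) :=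
  dirs.foldl (fA n m doom t x y) (v, accA)

def runB (n m : Int) (doom : List (List Int)) (t x y : Int) (dirs : List (Int × Int))
    (S : PySem.Set (Int × Int)) (accB : List (Int × Int)) (f : Bool) :
    PySem.Set (Int × Int) × List (Int × Int) × Bool :=
  dirs.foldl (fun st d => fB n m doom (n - 1, m - 1) t st (x + d.1, y + d.2)) (S, accB, f)

theorem runB_frozen (n m : Int) (doom : List (List Int)) (t x y : Int) :
    ∀ (ds : List (Int × Int)) (S : PySem.Set (Int × Int)) (acc : List (Int × Int)),
      ds.foldl (fun st d => fB n m doom (n - 1, m - 1) t st (x + d.1, y + d.2))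
        (S, acc, true) = (S, acc, true) := by
  intro ds
  induction ds with
  | nil => intro S acc; rfl
  | cons e es ihe => intro S acc; simpa using ihe S acc

theorem cell_aux (n m : Int) (doom : List (List Int)) (t x y : Int) :
    ∀ (dirs : List (Int × Int)) (v : List (List Bool)) (S : PySem.Set (Int × Int))
      (accA : List (Int × Int × Int)) (accB : List (Int × Int)),
      ShapeG n m v → CorrG n m v S →
      (((runB n m doom t x y dirs S accB false).2.2 = true →
          (n - 1, m - 1) ∈ (runA n m doom t x y dirs v accA).2.map
            (fun e => (e.1, e.2.1)))
        ∧ ((runB n m doom t x y dirs S accB false).2.2 = false →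
          ShapeG n m (runA n m doom t x y dirs v accA).1
          ∧ CorrG n m (runA n m doom t x y dirs v accA).1
              (runB n m doom t x y dirs S accB false).1
          ∧ ∃ L : List (Int × Int),
              (runA n m doom t x y dirs v accA).2
                = accA ++ L.map (fun c => (c.1, c.2, t + 1))
              ∧ (runB n m doom t x y dirs S accB false).2.1 = accB ++ L
              ∧ (n - 1, m - 1) ∉ L)) := by
  intro dirs
  induction dirs with
  | nil =>
    intro v S accA accB hS hC
    constructor
    · intro h; cases h
    · intro _
      exact ⟨hS, hC, [], by simp [runA], by simp [runB], by simp⟩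
  | cons d ds ih =>
    intro v S accA accB hS hC
    by_cases hg : 0 ≤ x + d.1 ∧ x + d.1 < n ∧ 0 ≤ y + d.2 ∧ y + d.2 < m
    · have hcc : gget v (x + d.1) (y + d.2)
          = PySem.Set.contains S (x + d.1, y + d.2) :=
        hC (x + d.1) (y + d.2) hg.1 hg.2.1 hg.2.2.1 hg.2.2.2
      by_cases hcond : gget v (x + d.1) (y + d.2) = false
          ∧ t + 1 < dget doom (x + d.1) (y + d.2)
      · have eA' : fA n m doom t x y (v, accA) d
            = (gset v (x + d.1) (y + d.2), accA ++ [(x + d.1, y + d.2, t + 1)]) := by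
          rw [fA_def, if_pos hg, if_pos hcond]
        have eA2 : runA n m doom t x y (d :: ds) v accA
            = runA n m doom t x y ds (gset v (x + d.1) (y + d.2))
                (accA ++ [(x + d.1, y + d.2, t + 1)]) := by
          simp only [runA, List.foldl_cons]
          rw [eA']
        by_cases htar : ((x + d.1, y + d.2) : Int × Int) = (n - 1, m - 1)
        · have eB' : fB n m doom (n - 1, m - 1) t (S, accB, false) (x + d.1, y + d.2)
              = (S, accB, true) := by
            rw [fB_def]
            simp only [Bool.false_eq_true, if_false]
            rw [if_pos hg, if_pos (by rw [← hcc]; exact hcond), if_pos htar]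
          have eB2 : runB n m doom t x y (d :: ds) S accB false = (S, accB, true) := by
            simp only [runB, List.foldl_cons]
            rw [eB']
            exact runB_frozen n m doom t x y ds S accB
          rw [eA2, eB2]
          constructor
          · intro _
            have hmem : ((x + d.1, y + d.2, t + 1) : Int × Int × Int)
                ∈ (runA n m doom t x y ds (gset v (x + d.1) (y + d.2))
                    (accA ++ [(x + d.1, y + d.2, t + 1)])).2 :=
              fA_acc_mono n m doom t x y ds _ _ _ (by simp)
            rw [← htar]
            exact List.mem_map.mpr ⟨_, hmem, rfl⟩
          · intro hfalse
            cases hfalse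
        · have eB' : fB n m doom (n - 1, m - 1) t (S, accB, false) (x + d.1, y + d.2)
              = (PySem.Set.add S (x + d.1, y + d.2),
                  accB ++ [(x + d.1, y + d.2)], false) := by
            rw [fB_def]
            simp only [Bool.false_eq_true, if_false]
            rw [if_pos hg, if_pos (by rw [← hcc]; exact hcond), if_neg htar]
          have eB2 : runB n m doom t x y (d :: ds) S accB false
              = runB n m doom t x y ds (PySem.Set.add S (x + d.1, y + d.2))
                  (accB ++ [(x + d.1, y + d.2)]) false := by
            simp only [runB, List.foldl_cons]
            rw [eB']
          have hS' : ShapeG n m (gset v (x + d.1) (y + d.2)) :=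
            gset_shape n m v _ _ hS
          have hC' : CorrG n m (gset v (x + d.1) (y + d.2))
              (PySem.Set.add S (x + d.1, y + d.2)) := by
            intro x' y' hx0 hx1 hy0 hy1
            rw [gget_gset n m v (x + d.1) (y + d.2) x' y' hS hg.1 hg.2.1 hg.2.2.1
              hg.2.2.2 hx0 hx1 hy0 hy1]
            by_cases hxy : ((x', y') : Int × Int) = (x + d.1, y + d.2)
            · rw [if_pos ⟨congrArg Prod.fst hxy, congrArg (fun p => p.2) hxy⟩, hxy,
                contains_add_self]
            · rw [if_neg (fun hand => hxy (Prod.ext hand.1 hand.2)),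
                contains_add_ne _ _ hxy]
              exact hC x' y' hx0 hx1 hy0 hy1
          have ihs := ih (gset v (x + d.1) (y + d.2))
            (PySem.Set.add S (x + d.1, y + d.2))
            (accA ++ [(x + d.1, y + d.2, t + 1)]) (accB ++ [(x + d.1, y + d.2)]) hS' hC'
          rw [eA2, eB2]
          constructor
          · exact fun hfl => ihs.1 hfl
          · intro hfl
            obtain ⟨hSf, hCf, L, hA2, hB2, hL⟩ := ihs.2 hfl
            refine ⟨hSf, hCf, (x + d.1, y + d.2) :: L, ?_, ?_, ?_⟩
            · rw [hA2]; simp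
            · rw [hB2]; simp
            · simp only [List.mem_cons, not_or]
              exact ⟨fun h => htar h.symm, hL⟩
      · have eA2 : runA n m doom t x y (d :: ds) v accA
            = runA n m doom t x y ds v accA := by
          simp only [runA, List.foldl_cons]
          rw [fA_def, if_pos hg, if_neg hcond]
        have eB2 : runB n m doom t x y (d :: ds) S accB false
            = runB n m doom t x y ds S accB false := by
          simp only [runB, List.foldl_cons]
          rw [fB_def]
          simp only [Bool.false_eq_true, if_false]
          rw [if_pos hg, if_neg (by rw [← hcc]; exact hcond)]
        rw [eA2, eB2]
        exact ih v S accA accB hS hC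
    · have eA2 : runA n m doom t x y (d :: ds) v accA
          = runA n m doom t x y ds v accA := by
        simp only [runA, List.foldl_cons]
        rw [fA_def, if_neg hg]
      have eB2 : runB n m doom t x y (d :: ds) S accB false
          = runB n m doom t x y ds S accB false := by
        simp only [runB, List.foldl_cons]
        rw [fB_def]
        simp only [Bool.false_eq_true, if_false]
        rw [if_neg hg]
      rw [eA2, eB2]
      exact ih v S accA accB hS hC

theorem loopA_yes (n m : Int) (doom : List (List Int)) :
    ∀ (v : List (List Bool)) (q : List (Int × Int × Int)),
      (n - 1, m - 1) ∈ q.map (fun e => (e.1, e.2.1)) →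
      loopA n m doom v q = "YES" := by
  intro v q
  induction v, q using loopA.induct n m doom with
  | case1 v => intro h; simp at h
  | case2 v x y t q hcond =>
    intro _
    rw [loopA, if_pos hcond]
  | case3 v x y t q hcond st ih =>
    intro hmem
    rw [loopA, if_neg hcond]
    apply ih
    simp only [List.map_cons, List.mem_cons] at hmem
    rcases hmem with heq | hmem
    · exact absurd ⟨congrArg Prod.fst heq.symm, congrArg (fun p => p.2) heq.symm⟩ hcond
    · simp only [List.map_append, List.mem_append]
      left
      exact hmem

theorem layer_sim (n m : Int) (doom : List (List Int)) (t : Int) :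
    ∀ (F : List (Int × Int)) (v : List (List Bool)) (S : PySem.Set (Int × Int))
      (accB : List (Int × Int)),
      ShapeG n m v → CorrG n m v S →
      (n - 1, m - 1) ∉ F → (n - 1, m - 1) ∉ accB →
      ∃ v' : List (List Bool),
        ((F.foldl (fun st c => stepB n m doom (n - 1, m - 1) t c.1 c.2 st)
            (S, accB, false)).2.2 = true →
          loopA n m doom v (F.map (fun c => (c.1, c.2, t))
            ++ accB.map (fun c => (c.1, c.2, t + 1))) = "YES")
        ∧ ((F.foldl (fun st c => stepB n m doom (n - 1, m - 1) t c.1 c.2 st)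
            (S, accB, false)).2.2 = false →
          loopA n m doom v (F.map (fun c => (c.1, c.2, t))
              ++ accB.map (fun c => (c.1, c.2, t + 1)))
            = loopA n m doom v'
                ((F.foldl (fun st c => stepB n m doom (n - 1, m - 1) t c.1 c.2 st)
                  (S, accB, false)).2.1.map (fun c => (c.1, c.2, t + 1)))
          ∧ ShapeG n m v'
          ∧ CorrG n m v'
              (F.foldl (fun st c => stepB n m doom (n - 1, m - 1) t c.1 c.2 st)
                (S, accB, false)).1
          ∧ (n - 1, m - 1) ∉
              (F.foldl (fun st c => stepB n m doom (n - 1, m - 1) t c.1 c.2 st)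
                (S, accB, false)).2.1) := by
  intro F
  induction F with
  | nil =>
    intro v S accB hS hC hF hacc
    refine ⟨v, ?_, ?_⟩
    · intro h; cases h
    · intro _
      exact ⟨by simp, hS, hC, hacc⟩
  | cons c F' ihF =>
    intro v S accB hS hC hF hacc
    have hF' : (n - 1, m - 1) ∉ F' := fun h => hF (List.mem_cons_of_mem _ h)
    have hcne : ¬(c.1 = n - 1 ∧ c.2 = m - 1) := by
      intro h
      apply hF
      have hc : c = ((n - 1, m - 1) : Int × Int) := Prod.ext h.1 h.2
      rw [hc]
      exact List.mem_cons_self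
    have hstep : stepB n m doom (n - 1, m - 1) t c.1 c.2 (S, accB, false)
        = runB n m doom t c.1 c.2 dirsA S accB false := by
      rw [stepB_eq]; rfl
    have hA1 : loopA n m doom v
        ((c :: F').map (fun c => (c.1, c.2, t)) ++ accB.map (fun c => (c.1, c.2, t + 1)))
        = loopA n m doom (runA n m doom t c.1 c.2 dirsA v []).1
            ((F'.map (fun c => (c.1, c.2, t)) ++ accB.map (fun c => (c.1, c.2, t + 1)))
              ++ (runA n m doom t c.1 c.2 dirsA v []).2) := by
      simp only [List.map_cons, List.cons_append]
      rw [loopA, if_neg hcne]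
      rfl
    have hcell := cell_aux n m doom t c.1 c.2 dirsA v S [] accB hS hC
    by_cases hfl : (runB n m doom t c.1 c.2 dirsA S accB false).2.2 = true
    · refine ⟨v, ?_, ?_⟩
      · intro _
        rw [hA1]
        apply loopA_yes
        rw [List.map_append]
        exact List.mem_append.mpr (Or.inr (hcell.1 hfl))
      · intro hfalse
        exfalso
        have hfold : (c :: F').foldl
            (fun st c => stepB n m doom (n - 1, m - 1) t c.1 c.2 st) (S, accB, false)
            = ((runB n m doom t c.1 c.2 dirsA S accB false).1,
                (runB n m doom t c.1 c.2 dirsA S accB false).2.1, true) := by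
          simp only [List.foldl_cons]
          rw [hstep]
          have e : runB n m doom t c.1 c.2 dirsA S accB false
              = ((runB n m doom t c.1 c.2 dirsA S accB false).1,
                  (runB n m doom t c.1 c.2 dirsA S accB false).2.1, true) := by
            rw [← hfl]
          rw [e]
          exact layerB_frozen n m doom (n - 1, m - 1) t F' _ _
        rw [hfold] at hfalse
        cases hfalse
    · have hfl' : (runB n m doom t c.1 c.2 dirsA S accB false).2.2 = false := by
        simpa using hfl
      obtain ⟨hSf, hCf, L, hA2, hB2, hL⟩ := hcell.2 hfl'
      have haccL : (n - 1, m - 1) ∉ accB ++ L := by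
        rw [List.mem_append]
        exact fun h => h.elim hacc hL
      obtain ⟨v'', hyes, hno⟩ := ihF (runA n m doom t c.1 c.2 dirsA v []).1
        (runB n m doom t c.1 c.2 dirsA S accB false).1 (accB ++ L) hSf hCf hF' haccL
      have hfoldeq : (c :: F').foldl
          (fun st c => stepB n m doom (n - 1, m - 1) t c.1 c.2 st) (S, accB, false)
          = F'.foldl (fun st c => stepB n m doom (n - 1, m - 1) t c.1 c.2 st)
              ((runB n m doom t c.1 c.2 dirsA S accB false).1, accB ++ L, false) := by
        simp only [List.foldl_cons]
        rw [hstep]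
        congr 1
        have heta : runB n m doom t c.1 c.2 dirsA S accB false
            = ((runB n m doom t c.1 c.2 dirsA S accB false).1,
                (runB n m doom t c.1 c.2 dirsA S accB false).2.1,
                (runB n m doom t c.1 c.2 dirsA S accB false).2.2) := rfl
        rw [heta, hB2, hfl']
      have hqeq : (F'.map (fun c => (c.1, c.2, t)) ++ accB.map (fun c => (c.1, c.2, t + 1)))
            ++ (runA n m doom t c.1 c.2 dirsA v []).2
          = F'.map (fun c => (c.1, c.2, t))
            ++ (accB ++ L).map (fun c => (c.1, c.2, t + 1)) := by
        rw [hA2]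
        simp
      refine ⟨v'', ?_, ?_⟩
      · intro hflag
        rw [hA1, hqeq]
        apply hyes
        rw [hfoldeq] at hflag
        exact hflag
      · intro hflag
        rw [hfoldeq] at hflag
        obtain ⟨heq, hSf2, hCf2, hnt⟩ := hno hflag
        rw [hfoldeq]
        exact ⟨by rw [hA1, hqeq]; exact heq, hSf2, hCf2, hnt⟩

theorem loop_sim (n m : Int) (doom : List (List Int)) :
    ∀ (S : PySem.Set (Int × Int)) (F : List (Int × Int)) (t : Int)
      (v : List (List Bool)),
      ShapeG n m v → CorrG n m v S → (n - 1, m - 1) ∉ F →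
      loopA n m doom v (F.map (fun c => (c.1, c.2, t)))
        = loopB n m doom (n - 1, m - 1) S F t := by
  intro S F t
  induction S, F, t using loopB.induct n m doom (n - 1, m - 1) with
  | case1 S t =>
    intro v _ _ _
    simp [loopA, loopB]
  | case2 S f fs t st hflag =>
    intro v hS hC hF
    obtain ⟨v', hyes, _⟩ := layer_sim n m doom t (f :: fs) v S [] hS hC hF
      (by simp)
    rw [loopB, if_pos hflag]
    have := hyes (by exact hflag)
    simpa using this
  | case3 S f fs t st hflag ih =>
    intro v hS hC hF
    obtain ⟨v', _, hno⟩ := layer_sim n m doom t (f :: fs) v S [] hS hC hF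
      (by simp)
    obtain ⟨heq, hSf, hCf, hnt⟩ := hno (by simpa using hflag)
    rw [loopB, if_neg hflag]
    have := ih v' hSf hCf hnt
    rw [← this]
    simpa using heq

theorem gget_grid0 (n m x y : Int) (hx0 : 0 ≤ x) (hx1 : x < n) (hy0 : 0 ≤ y)
    (hy1 : y < m) :
    gget (List.replicate n.toNat (List.replicate m.toNat false)) x y = false := by
  unfold gget
  rw [if_pos ⟨hx0, hy0⟩, List.getElem?_replicate, if_pos (by omega)]
  simp only [Option.getD_some]
  rw [List.getElem?_replicate, if_pos (by omega)]
  rfl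

theorem shape_grid0 (n m : Int) :
    ShapeG n m (List.replicate n.toNat (List.replicate m.toNat false)) := by
  refine ⟨by simp, ?_⟩
  intro r hr
  rw [List.eq_of_mem_replicate hr]
  simp

theorem A_eq_loopB : ∀ (n m : Int) (doom : List (List Int)),
    doomsday_escape n m doom
      = if ((n - 1, m - 1) : Int × Int) = ((0 : Int), (0 : Int)) then "YES"
        else loopB n m doom (n - 1, m - 1) (PySem.Set.ofList [(0, 0)]) [(0, 0)] 0 := by
  intro n m doom
  unfold doomsday_escape
  by_cases htar : ((n - 1, m - 1) : Int × Int) = ((0 : Int), (0 : Int))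
  · rw [if_pos htar, loopA,
      if_pos ⟨(congrArg Prod.fst htar).symm, (congrArg (fun p => p.2) htar).symm⟩]
  · rw [if_neg htar]
    have hS0 : ShapeG n m
        (gset (List.replicate n.toNat (List.replicate m.toNat false)) 0 0) :=
      gset_shape n m _ 0 0 (shape_grid0 n m)
    by_cases hnm : 1 ≤ n ∧ 1 ≤ m
    · have hC0 : CorrG n m
          (gset (List.replicate n.toNat (List.replicate m.toNat false)) 0 0)
          (PySem.Set.ofList [(0, 0)]) := by
        intro x y hx0 hx1 hy0 hy1
        rw [gget_gset n m _ 0 0 x y (shape_grid0 n m) le_rfl (by omega) le_rfl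
          (by omega) hx0 hx1 hy0 hy1]
        have hol : PySem.Set.ofList [((0 : Int), (0 : Int))]
            = [((0 : Int), (0 : Int))] := rfl
        by_cases hxy : ((x, y) : Int × Int) = ((0 : Int), (0 : Int))
        · rw [if_pos ⟨congrArg Prod.fst hxy, congrArg (fun p => p.2) hxy⟩]
          exact ((PySem.Set.contains_iff _ _).mpr (by rw [hol, hxy]; exact List.mem_cons_self)).symm
        · rw [if_neg (fun hand => hxy (Prod.ext hand.1 hand.2)),
            gget_grid0 n m x y hx0 hx1 hy0 hy1]
          cases hcs : PySem.Set.contains (PySem.Set.ofList [((0 : Int), (0 : Int))]) (x, y) with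
          | false => rfl
          | true =>
            have := (PySem.Set.contains_iff _ _).mp hcs
            rw [hol] at this
            simp only [List.mem_singleton] at this
            exact absurd this hxy
      have hF0 : ((n - 1, m - 1) : Int × Int) ∉ [((0 : Int), (0 : Int))] := by
        simp only [List.mem_singleton]
        exact htar
      have hsim := loop_sim n m doom (PySem.Set.ofList [(0, 0)]) [(0, 0)] 0
        (gset (List.replicate n.toNat (List.replicate m.toNat false)) 0 0)
        hS0 hC0 hF0
      simpa using hsim
    · have hC0 : CorrG n m
          (gset (List.replicate n.toNat (List.replicate m.toNat false)) 0 0)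
          (PySem.Set.ofList [(0, 0)]) := by
        intro x y hx0 hx1 hy0 hy1
        exact absurd ⟨by omega, by omega⟩ hnm
      have hF0 : ((n - 1, m - 1) : Int × Int) ∉ [((0 : Int), (0 : Int))] := by
        simp only [List.mem_singleton]
        exact htar
      have hsim := loop_sim n m doom (PySem.Set.ofList [(0, 0)]) [(0, 0)] 0
        (gset (List.replicate n.toNat (List.replicate m.toNat false)) 0 0)
        hS0 hC0 hF0
      simpa using hsim

-- ---- loopB (layers) = loopC (saturation sweep) ----

def InR (n m : Int) (c : Int × Int) : Prop :=
  0 ≤ c.1 ∧ c.1 < n ∧ 0 ≤ c.2 ∧ c.2 < m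

-- cells a layer at counter t adds, described declaratively
def AddL (n m : Int) (doom : List (List Int)) (target : Int × Int) (t : Int)
    (F : List (Int × Int)) (S : PySem.Set (Int × Int)) (c : Int × Int) : Prop :=
  (∃ g ∈ F, ∃ d ∈ dirsA, c = (g.1 + d.1, g.2 + d.2)) ∧ InR n m c ∧ c ∉ S
    ∧ c ≠ target ∧ t + 1 < dget doom c.1 c.2

theorem fB_fold_frozen (n m : Int) (doom : List (List Int)) (target : Int × Int)
    (t : Int) (g : Int × Int) :
    ∀ (ds : List (Int × Int)) (V : PySem.Set (Int × Int)) (L : List (Int × Int)),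
      ds.foldl (fun st d => fB n m doom target t st (g.1 + d.1, g.2 + d.2)) (V, L, true)
        = (V, L, true) := by
  intro ds
  induction ds with
  | nil => intro V L; rfl
  | cons d ds ih => intro V L; simpa using ih V L


theorem fB_dirs_char (n m : Int) (doom : List (List Int)) (target : Int × Int)
    (t : Int) (g : Int × Int) :
    ∀ (ds : List (Int × Int)) (V : PySem.Set (Int × Int)) (L : List (Int × Int)),
      target ∉ V →
      (((ds.foldl (fun st d => fB n m doom target t st (g.1 + d.1, g.2 + d.2))
          (V, L, false)).2.2 = true ↔
        (∃ d ∈ ds, target = (g.1 + d.1, g.2 + d.2)) ∧ InR n m target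
          ∧ t + 1 < dget doom target.1 target.2)
      ∧ ((ds.foldl (fun st d => fB n m doom target t st (g.1 + d.1, g.2 + d.2))
          (V, L, false)).2.2 = false →
        (∀ c, c ∈ (ds.foldl (fun st d => fB n m doom target t st (g.1 + d.1, g.2 + d.2))
            (V, L, false)).1 ↔ c ∈ V ∨
          ((∃ d ∈ ds, c = (g.1 + d.1, g.2 + d.2)) ∧ InR n m c ∧ c ∉ V ∧ c ≠ target
            ∧ t + 1 < dget doom c.1 c.2))
        ∧ (∀ c, c ∈ (ds.foldl (fun st d => fB n m doom target t st (g.1 + d.1, g.2 + d.2))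
            (V, L, false)).2.1 ↔ c ∈ L ∨
          ((∃ d ∈ ds, c = (g.1 + d.1, g.2 + d.2)) ∧ InR n m c ∧ c ∉ V ∧ c ≠ target
            ∧ t + 1 < dget doom c.1 c.2))
        ∧ target ∉ (ds.foldl (fun st d => fB n m doom target t st (g.1 + d.1, g.2 + d.2))
            (V, L, false)).1)) := by
  intro ds
  induction ds with
  | nil =>
    intro V L hTV
    refine ⟨by simp, fun _ => ⟨fun c => by simp, fun c => by simp, hTV⟩⟩
  | cons d ds ih =>
    intro V L hTV
    simp only [List.foldl_cons]
    by_cases hg : 0 ≤ g.1 + d.1 ∧ g.1 + d.1 < n ∧ 0 ≤ g.2 + d.2 ∧ g.2 + d.2 < m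
    · by_cases hdm : t + 1 < dget doom (g.1 + d.1) (g.2 + d.2)
      · by_cases hmem : ((g.1 + d.1, g.2 + d.2) : Int × Int) ∈ V
        · -- neighbour already visited: the step is the identity
          have hcf : PySem.Set.contains V (g.1 + d.1, g.2 + d.2) = true :=
            (PySem.Set.contains_iff _ _).mpr hmem
          have hstep : fB n m doom target t (V, L, false) (g.1 + d.1, g.2 + d.2)
              = (V, L, false) := by
            rw [fB_def]
            simp only [Bool.false_eq_true, if_false]
            rw [if_pos hg, if_neg (fun hh => by simp at hh; exact hh.1 hmem)]
          rw [hstep]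
          obtain ⟨ihf, ihr⟩ := ih V L hTV
          refine ⟨?_, ?_⟩
          · rw [ihf]
            constructor
            · rintro ⟨⟨d', hd', he⟩, h2, h3⟩
              exact ⟨⟨d', List.mem_cons_of_mem _ hd', he⟩, h2, h3⟩
            · rintro ⟨⟨d', hd', he⟩, h2, h3⟩
              rcases List.mem_cons.mp hd' with rfl | hd''
              · exact absurd (by rw [he]; exact hmem) hTV
              · exact ⟨⟨d', hd'', he⟩, h2, h3⟩
          · intro hfl
            obtain ⟨m1, m2, m3⟩ := ihr hfl
            refine ⟨fun c => ?_, fun c => ?_, m3⟩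
            · rw [m1 c]
              constructor
              · rintro (h | ⟨⟨d', hd', he⟩, h2, h3, h4, h5⟩)
                · exact Or.inl h
                · exact Or.inr ⟨⟨d', List.mem_cons_of_mem _ hd', he⟩, h2, h3, h4, h5⟩
              · rintro (h | ⟨⟨d', hd', he⟩, h2, h3, h4, h5⟩)
                · exact Or.inl h
                · rcases List.mem_cons.mp hd' with rfl | hd''
                  · exact absurd (by rw [he]; exact hmem) h3
                  · exact Or.inr ⟨⟨d', hd'', he⟩, h2, h3, h4, h5⟩
            · rw [m2 c]
              constructor
              · rintro (h | ⟨⟨d', hd', he⟩, h2, h3, h4, h5⟩)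
                · exact Or.inl h
                · exact Or.inr ⟨⟨d', List.mem_cons_of_mem _ hd', he⟩, h2, h3, h4, h5⟩
              · rintro (h | ⟨⟨d', hd', he⟩, h2, h3, h4, h5⟩)
                · exact Or.inl h
                · rcases List.mem_cons.mp hd' with rfl | hd''
                  · exact absurd (by rw [he]; exact hmem) h3
                  · exact Or.inr ⟨⟨d', hd'', he⟩, h2, h3, h4, h5⟩
        · have hcf : PySem.Set.contains V (g.1 + d.1, g.2 + d.2) = false := by
            cases h : PySem.Set.contains V (g.1 + d.1, g.2 + d.2) with
            | false => rfl
            | true => exact absurd ((PySem.Set.contains_iff _ _).mp h) hmem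
          by_cases htar : ((g.1 + d.1, g.2 + d.2) : Int × Int) = target
          · -- the target is enqueued here: freeze
            have hstep : fB n m doom target t (V, L, false) (g.1 + d.1, g.2 + d.2)
                = (V, L, true) := by
              rw [fB_def]
              simp only [Bool.false_eq_true, if_false]
              rw [if_pos hg, if_pos ⟨hcf, hdm⟩, if_pos htar]
            rw [hstep, fB_fold_frozen]
            refine ⟨?_, ?_⟩
            · constructor
              · intro _
                refine ⟨⟨d, List.mem_cons_self, htar.symm⟩, ?_, ?_⟩
                · rw [← htar]; exact hg
                · rw [← htar]; exact hdm
              · intro _; rfl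
            · intro hfl; simp at hfl
          · -- a new ordinary cell is added
            have hstep : fB n m doom target t (V, L, false) (g.1 + d.1, g.2 + d.2)
                = (PySem.Set.add V (g.1 + d.1, g.2 + d.2),
                    L ++ [(g.1 + d.1, g.2 + d.2)], false) := by
              rw [fB_def]
              simp only [Bool.false_eq_true, if_false]
              rw [if_pos hg, if_pos ⟨hcf, hdm⟩, if_neg htar]
            rw [hstep]
            have hTV' : target ∉ PySem.Set.add V (g.1 + d.1, g.2 + d.2) := by
              rw [PySem.Set.mem_add]
              rintro (h | h)
              · exact hTV h
              · exact htar h.symm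
            obtain ⟨ihf, ihr⟩ := ih (PySem.Set.add V (g.1 + d.1, g.2 + d.2))
              (L ++ [(g.1 + d.1, g.2 + d.2)]) hTV'
            refine ⟨?_, ?_⟩
            · rw [ihf]
              constructor
              · rintro ⟨⟨d', hd', he⟩, h2, h3⟩
                exact ⟨⟨d', List.mem_cons_of_mem _ hd', he⟩, h2, h3⟩
              · rintro ⟨⟨d', hd', he⟩, h2, h3⟩
                rcases List.mem_cons.mp hd' with rfl | hd''
                · exact absurd he.symm htar
                · exact ⟨⟨d', hd'', he⟩, h2, h3⟩
            · intro hfl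
              obtain ⟨m1, m2, m3⟩ := ihr hfl
              refine ⟨fun c => ?_, fun c => ?_, m3⟩
              · rw [m1 c, PySem.Set.mem_add]
                constructor
                · rintro ((h | h) | ⟨⟨d', hd', he⟩, h2, h3, h4, h5⟩)
                  · exact Or.inl h
                  · refine Or.inr ⟨⟨d, List.mem_cons_self, h⟩, ?_, ?_, ?_, ?_⟩ <;> rw [h]
                    · exact hg
                    · exact hmem
                    · exact htar
                    · exact hdm
                  · refine Or.inr ⟨⟨d', List.mem_cons_of_mem _ hd', he⟩, h2, ?_, h4, h5⟩
                    intro hcV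
                    exact h3 (Or.inl hcV)
                · rintro (h | ⟨⟨d', hd', he⟩, h2, h3, h4, h5⟩)
                  · exact Or.inl (Or.inl h)
                  · by_cases hcc : c = ((g.1 + d.1, g.2 + d.2) : Int × Int)
                    · exact Or.inl (Or.inr hcc)
                    · rcases List.mem_cons.mp hd' with rfl | hd''
                      · exact absurd he hcc
                      · refine Or.inr ⟨⟨d', hd'', he⟩, h2, ?_, h4, h5⟩
                        rintro (h | h)
                        · exact h3 h
                        · exact hcc h
              · rw [m2 c, List.mem_append, List.mem_singleton, PySem.Set.mem_add]
                constructor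
                · rintro ((h | h) | ⟨⟨d', hd', he⟩, h2, h3, h4, h5⟩)
                  · exact Or.inl h
                  · refine Or.inr ⟨⟨d, List.mem_cons_self, h⟩, ?_, ?_, ?_, ?_⟩ <;> rw [h]
                    · exact hg
                    · exact hmem
                    · exact htar
                    · exact hdm
                  · refine Or.inr ⟨⟨d', List.mem_cons_of_mem _ hd', he⟩, h2, ?_, h4, h5⟩
                    intro hcV
                    exact h3 (Or.inl hcV)
                · rintro (h | ⟨⟨d', hd', he⟩, h2, h3, h4, h5⟩)
                  · exact Or.inl (Or.inl h)
                  · by_cases hcc : c = ((g.1 + d.1, g.2 + d.2) : Int × Int)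
                    · exact Or.inl (Or.inr hcc)
                    · rcases List.mem_cons.mp hd' with rfl | hd''
                      · exact absurd he hcc
                      · refine Or.inr ⟨⟨d', hd'', he⟩, h2, ?_, h4, h5⟩
                        rintro (h | h)
                        · exact h3 h
                        · exact hcc h
      · -- the doom test fails: identity step
        have hstep : fB n m doom target t (V, L, false) (g.1 + d.1, g.2 + d.2)
            = (V, L, false) := by
          rw [fB_def]
          simp only [Bool.false_eq_true, if_false]
          rw [if_pos hg, if_neg (fun hh => hdm hh.2)]
        rw [hstep]
        obtain ⟨ihf, ihr⟩ := ih V L hTV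
        refine ⟨?_, ?_⟩
        · rw [ihf]
          constructor
          · rintro ⟨⟨d', hd', he⟩, h2, h3⟩
            exact ⟨⟨d', List.mem_cons_of_mem _ hd', he⟩, h2, h3⟩
          · rintro ⟨⟨d', hd', he⟩, h2, h3⟩
            rcases List.mem_cons.mp hd' with rfl | hd''
            · exact absurd (by rw [he] at h3; exact h3) hdm
            · exact ⟨⟨d', hd'', he⟩, h2, h3⟩
        · intro hfl
          obtain ⟨m1, m2, m3⟩ := ihr hfl
          refine ⟨fun c => ?_, fun c => ?_, m3⟩
          · rw [m1 c]
            constructor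
            · rintro (h | ⟨⟨d', hd', he⟩, h2, h3, h4, h5⟩)
              · exact Or.inl h
              · exact Or.inr ⟨⟨d', List.mem_cons_of_mem _ hd', he⟩, h2, h3, h4, h5⟩
            · rintro (h | ⟨⟨d', hd', he⟩, h2, h3, h4, h5⟩)
              · exact Or.inl h
              · rcases List.mem_cons.mp hd' with rfl | hd''
                · exact absurd (by rw [he] at h5; exact h5) hdm
                · exact Or.inr ⟨⟨d', hd'', he⟩, h2, h3, h4, h5⟩
          · rw [m2 c]
            constructor
            · rintro (h | ⟨⟨d', hd', he⟩, h2, h3, h4, h5⟩)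
              · exact Or.inl h
              · exact Or.inr ⟨⟨d', List.mem_cons_of_mem _ hd', he⟩, h2, h3, h4, h5⟩
            · rintro (h | ⟨⟨d', hd', he⟩, h2, h3, h4, h5⟩)
              · exact Or.inl h
              · rcases List.mem_cons.mp hd' with rfl | hd''
                · exact absurd (by rw [he] at h5; exact h5) hdm
                · exact Or.inr ⟨⟨d', hd'', he⟩, h2, h3, h4, h5⟩
    · -- out of bounds: identity step
      have hstep : fB n m doom target t (V, L, false) (g.1 + d.1, g.2 + d.2)
          = (V, L, false) := by
        rw [fB_def]
        simp only [Bool.false_eq_true, if_false]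
        rw [if_neg hg]
      rw [hstep]
      obtain ⟨ihf, ihr⟩ := ih V L hTV
      refine ⟨?_, ?_⟩
      · rw [ihf]
        constructor
        · rintro ⟨⟨d', hd', he⟩, h2, h3⟩
          exact ⟨⟨d', List.mem_cons_of_mem _ hd', he⟩, h2, h3⟩
        · rintro ⟨⟨d', hd', he⟩, h2, h3⟩
          rcases List.mem_cons.mp hd' with rfl | hd''
          · exact absurd (by rw [he] at h2; exact h2) hg
          · exact ⟨⟨d', hd'', he⟩, h2, h3⟩
      · intro hfl
        obtain ⟨m1, m2, m3⟩ := ihr hfl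
        refine ⟨fun c => ?_, fun c => ?_, m3⟩
        · rw [m1 c]
          constructor
          · rintro (h | ⟨⟨d', hd', he⟩, h2, h3, h4, h5⟩)
            · exact Or.inl h
            · exact Or.inr ⟨⟨d', List.mem_cons_of_mem _ hd', he⟩, h2, h3, h4, h5⟩
          · rintro (h | ⟨⟨d', hd', he⟩, h2, h3, h4, h5⟩)
            · exact Or.inl h
            · rcases List.mem_cons.mp hd' with rfl | hd''
              · exact absurd (by rw [he] at h2; exact h2) hg
              · exact Or.inr ⟨⟨d', hd'', he⟩, h2, h3, h4, h5⟩
        · rw [m2 c]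
          constructor
          · rintro (h | ⟨⟨d', hd', he⟩, h2, h3, h4, h5⟩)
            · exact Or.inl h
            · exact Or.inr ⟨⟨d', List.mem_cons_of_mem _ hd', he⟩, h2, h3, h4, h5⟩
          · rintro (h | ⟨⟨d', hd', he⟩, h2, h3, h4, h5⟩)
            · exact Or.inl h
            · rcases List.mem_cons.mp hd' with rfl | hd''
              · exact absurd (by rw [he] at h2; exact h2) hg
              · exact Or.inr ⟨⟨d', hd'', he⟩, h2, h3, h4, h5⟩

theorem stepB_fold_char (n m : Int) (doom : List (List Int)) (target : Int × Int)
    (t : Int) :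
    ∀ (G : List (Int × Int)) (V : PySem.Set (Int × Int)) (L : List (Int × Int)),
      target ∉ V →
      (((G.foldl (fun st c => stepB n m doom target t c.1 c.2 st) (V, L, false)).2.2 = true ↔
        (∃ g ∈ G, ∃ d ∈ dirsA, target = (g.1 + d.1, g.2 + d.2)) ∧ InR n m target
          ∧ t + 1 < dget doom target.1 target.2)
      ∧ ((G.foldl (fun st c => stepB n m doom target t c.1 c.2 st) (V, L, false)).2.2 = false →
        (∀ c, c ∈ (G.foldl (fun st c => stepB n m doom target t c.1 c.2 st) (V, L, false)).1
            ↔ c ∈ V ∨ AddL n m doom target t G V c)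
        ∧ (∀ c, c ∈ (G.foldl (fun st c => stepB n m doom target t c.1 c.2 st) (V, L, false)).2.1
            ↔ c ∈ L ∨ AddL n m doom target t G V c)
        ∧ target ∉ (G.foldl (fun st c => stepB n m doom target t c.1 c.2 st) (V, L, false)).1)) := by
  intro G
  induction G with
  | nil =>
    intro V L hTV
    refine ⟨by simp, fun _ => ⟨fun c => by simp [AddL], fun c => by simp [AddL], hTV⟩⟩
  | cons g G' ih =>
    intro V L hTV
    simp only [List.foldl_cons]
    rw [stepB_eq]
    obtain ⟨hcf, hcr⟩ := fB_dirs_char n m doom target t g dirsA V L hTV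
    by_cases hfl : (dirsA.foldl (fun st d => fB n m doom target t st (g.1 + d.1, g.2 + d.2))
        (V, L, false)).2.2 = true
    · have hX : dirsA.foldl (fun st d => fB n m doom target t st (g.1 + d.1, g.2 + d.2))
          (V, L, false)
          = ((dirsA.foldl (fun st d => fB n m doom target t st (g.1 + d.1, g.2 + d.2))
              (V, L, false)).1,
             (dirsA.foldl (fun st d => fB n m doom target t st (g.1 + d.1, g.2 + d.2))
              (V, L, false)).2.1, true) :=
        Prod.ext rfl (Prod.ext rfl hfl)
      rw [hX, layerB_frozen]
      obtain ⟨⟨d, hd, he⟩, h2, h3⟩ := hcf.mp hfl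
      refine ⟨⟨fun _ => ⟨⟨g, List.mem_cons_self, d, hd, he⟩, h2, h3⟩, fun _ => rfl⟩,
        fun hcontra => by simp at hcontra⟩
    · have hfl' : (dirsA.foldl (fun st d => fB n m doom target t st (g.1 + d.1, g.2 + d.2))
          (V, L, false)).2.2 = false := by simpa using hfl
      obtain ⟨m1, m2, m3⟩ := hcr hfl'
      have hX : dirsA.foldl (fun st d => fB n m doom target t st (g.1 + d.1, g.2 + d.2))
          (V, L, false)
          = ((dirsA.foldl (fun st d => fB n m doom target t st (g.1 + d.1, g.2 + d.2))
              (V, L, false)).1,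
             (dirsA.foldl (fun st d => fB n m doom target t st (g.1 + d.1, g.2 + d.2))
              (V, L, false)).2.1, false) :=
        Prod.ext rfl (Prod.ext rfl hfl')
      rw [hX]
      obtain ⟨ihf, ihr⟩ := ih (dirsA.foldl (fun st d => fB n m doom target t st
        (g.1 + d.1, g.2 + d.2)) (V, L, false)).1
        (dirsA.foldl (fun st d => fB n m doom target t st (g.1 + d.1, g.2 + d.2))
          (V, L, false)).2.1 m3
      refine ⟨?_, ?_⟩
      · rw [ihf]
        constructor
        · rintro ⟨⟨g', hg', d, hd, he⟩, h2, h3⟩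
          exact ⟨⟨g', List.mem_cons_of_mem _ hg', d, hd, he⟩, h2, h3⟩
        · rintro ⟨⟨g', hg', d, hd, he⟩, h2, h3⟩
          rcases List.mem_cons.mp hg' with rfl | hg''
          · exact absurd (hcf.mpr ⟨⟨d, hd, he⟩, h2, h3⟩) hfl
          · exact ⟨⟨g', hg'', d, hd, he⟩, h2, h3⟩
      · intro hfl2
        obtain ⟨k1, k2, k3⟩ := ihr hfl2
        refine ⟨fun c => ?_, fun c => ?_, k3⟩
        · rw [k1 c]
          simp only [AddL]
          constructor
          · rintro (hx | ⟨⟨g', hg', d, hd, he⟩, hIn, hnX, hnt, hdm⟩)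
            · rcases (m1 c).mp hx with hv | ⟨⟨d, hd, he⟩, hIn, hnv, hnt, hdm⟩
              · exact Or.inl hv
              · exact Or.inr ⟨⟨g, List.mem_cons_self, d, hd, he⟩, hIn, hnv, hnt, hdm⟩
            · refine Or.inr ⟨⟨g', List.mem_cons_of_mem _ hg', d, hd, he⟩, hIn, ?_, hnt, hdm⟩
              exact fun hv => hnX ((m1 c).mpr (Or.inl hv))
          · rintro (hv | ⟨⟨g', hg', d, hd, he⟩, hIn, hnv, hnt, hdm⟩)
            · exact Or.inl ((m1 c).mpr (Or.inl hv))
            · by_cases hcx : c ∈ (dirsA.foldl (fun st d => fB n m doom target t st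
                  (g.1 + d.1, g.2 + d.2)) (V, L, false)).1
              · exact Or.inl hcx
              · rcases List.mem_cons.mp hg' with rfl | hg''
                · exact absurd ((m1 c).mpr (Or.inr ⟨⟨d, hd, he⟩, hIn, hnv, hnt, hdm⟩)) hcx
                · exact Or.inr ⟨⟨g', hg'', d, hd, he⟩, hIn, hcx, hnt, hdm⟩
        · rw [k2 c]
          simp only [AddL]
          constructor
          · rintro (hx | ⟨⟨g', hg', d, hd, he⟩, hIn, hnX, hnt, hdm⟩)
            · rcases (m2 c).mp hx with hv | ⟨⟨d, hd, he⟩, hIn, hnv, hnt, hdm⟩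
              · exact Or.inl hv
              · exact Or.inr ⟨⟨g, List.mem_cons_self, d, hd, he⟩, hIn, hnv, hnt, hdm⟩
            · refine Or.inr ⟨⟨g', List.mem_cons_of_mem _ hg', d, hd, he⟩, hIn, ?_, hnt, hdm⟩
              exact fun hv => hnX ((m1 c).mpr (Or.inl hv))
          · rintro (hv | ⟨⟨g', hg', d, hd, he⟩, hIn, hnv, hnt, hdm⟩)
            · exact Or.inl ((m2 c).mpr (Or.inl hv))
            · by_cases hcx : c ∈ (dirsA.foldl (fun st d => fB n m doom target t st
                  (g.1 + d.1, g.2 + d.2)) (V, L, false)).1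
              · rcases (m1 c).mp hcx with hv2 | hP
                · exact absurd hv2 hnv
                · exact Or.inl ((m2 c).mpr (Or.inr hP))
              · rcases List.mem_cons.mp hg' with rfl | hg''
                · exact absurd ((m1 c).mpr (Or.inr ⟨⟨d, hd, he⟩, hIn, hnv, hnt, hdm⟩)) hcx
                · exact Or.inr ⟨⟨g', hg'', d, hd, he⟩, hIn, hcx, hnt, hdm⟩

-- adjacency through dirsA is symmetric
theorem adj_symm (F : List (Int × Int)) (c : Int × Int) :
    (∃ g ∈ F, ∃ d ∈ dirsA, c = (g.1 + d.1, g.2 + d.2))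
      ↔ ∃ d ∈ dirsA, ((c.1 + d.1, c.2 + d.2) : Int × Int) ∈ F := by
  constructor
  · rintro ⟨g, hg, d, hd, rfl⟩
    refine ⟨(-d.1, -d.2), ?_, ?_⟩
    · simp [dirsA, Prod.ext_iff] at hd ⊢
      omega
    · have he : ((g.1 + d.1 + -d.1, g.2 + d.2 + -d.2) : Int × Int) = g := by
        rw [Prod.ext_iff]
        constructor <;> simp
      simpa [he] using hg
  · rintro ⟨d, hd, hm⟩
    refine ⟨(c.1 + d.1, c.2 + d.2), hm, (-d.1, -d.2), ?_, ?_⟩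
    · simp [dirsA, Prod.ext_iff] at hd ⊢
      omega
    · rw [Prod.ext_iff]
      constructor <;> simp

-- the helper 'grows', characterised over the frontier set
theorem grows_char (n m : Int) (doom : List (List Int)) (reached : List (List Bool))
    (S : PySem.Set (Int × Int)) (t' : Int) (i j : Nat)
    (hi : i < n.toNat) (hj : j < m.toNat)
    (hCorr : ∀ i j : Nat, i < n.toNat → j < m.toNat →
      (bget reached i j = true ↔ (((i : Nat) : Int), ((j : Nat) : Int)) ∈ S)) :
    growsB n m doom reached t' i j = true
      ↔ ((((i : Nat) : Int), ((j : Nat) : Int)) ∉ S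
          ∧ t' < dget doom ((i : Nat) : Int) ((j : Nat) : Int)
          ∧ ∃ d ∈ dirsA, InR n m (((i : Nat) : Int) + d.1, ((j : Nat) : Int) + d.2)
              ∧ ((((i : Nat) : Int) + d.1, ((j : Nat) : Int) + d.2) : Int × Int) ∈ S) := by
  have hIn : ((i : Nat) : Int) < n := by omega
  have hJm : ((j : Nat) : Int) < m := by omega
  have hnot : (!(bget reached i j)) = true ↔ ((((i : Nat) : Int), ((j : Nat) : Int)) : Int × Int) ∉ S := by
    rw [Bool.not_eq_eq_eq_not, Bool.not_true, ← Bool.not_eq_true, not_iff_not]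
    exact hCorr i j hi hj
  unfold growsB
  simp only [Bool.and_eq_true, Bool.or_eq_true, decide_eq_true_eq]
  constructor
  · rintro ⟨⟨h1, ((⟨h4, h5⟩ | ⟨h4, h5⟩) | ⟨h4, h5⟩) | ⟨h4, h5⟩⟩, h2⟩
    · refine ⟨hnot.mp h1, h2, (-1, 0), by simp [dirsA],
        ⟨show (0:Int) ≤ (i : Int) + -1 by omega, show ((i : Int) + -1) < n by omega,
         show (0:Int) ≤ (j : Int) + 0 by omega, show ((j : Int) + 0) < m by omega⟩, ?_⟩
      have hc := (hCorr (i - 1) j (by omega) hj).mp h5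
      have he : ((((i - 1 : Nat) : Int), ((j : Nat) : Int)) : Int × Int)
          = ((i : Int) + -1, (j : Int) + 0) := by
        rw [Prod.ext_iff]; constructor <;> simp <;> omega
      rwa [he] at hc
    · refine ⟨hnot.mp h1, h2, (1, 0), by simp [dirsA],
        ⟨show (0:Int) ≤ (i : Int) + 1 by omega, show ((i : Int) + 1) < n by omega,
         show (0:Int) ≤ (j : Int) + 0 by omega, show ((j : Int) + 0) < m by omega⟩, ?_⟩
      have hc := (hCorr (i + 1) j (by omega) hj).mp h5
      have he : ((((i + 1 : Nat) : Int), ((j : Nat) : Int)) : Int × Int)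
          = ((i : Int) + 1, (j : Int) + 0) := by
        rw [Prod.ext_iff]; constructor <;> simp
      rwa [he] at hc
    · refine ⟨hnot.mp h1, h2, (0, -1), by simp [dirsA],
        ⟨show (0:Int) ≤ (i : Int) + 0 by omega, show ((i : Int) + 0) < n by omega,
         show (0:Int) ≤ (j : Int) + -1 by omega, show ((j : Int) + -1) < m by omega⟩, ?_⟩
      have hc := (hCorr i (j - 1) hi (by omega)).mp h5
      have he : ((((i : Nat) : Int), ((j - 1 : Nat) : Int)) : Int × Int)
          = ((i : Int) + 0, (j : Int) + -1) := by
        rw [Prod.ext_iff]; constructor <;> simp <;> omega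
      rwa [he] at hc
    · refine ⟨hnot.mp h1, h2, (0, 1), by simp [dirsA],
        ⟨show (0:Int) ≤ (i : Int) + 0 by omega, show ((i : Int) + 0) < n by omega,
         show (0:Int) ≤ (j : Int) + 1 by omega, show ((j : Int) + 1) < m by omega⟩, ?_⟩
      have hc := (hCorr i (j + 1) hi (by omega)).mp h5
      have he : ((((i : Nat) : Int), ((j + 1 : Nat) : Int)) : Int × Int)
          = ((i : Int) + 0, (j : Int) + 1) := by
        rw [Prod.ext_iff]; constructor <;> simp
      rwa [he] at hc
  · rintro ⟨h1, h2, d, hd, hInR, hS⟩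
    refine ⟨⟨hnot.mpr h1, ?_⟩, h2⟩
    simp [dirsA] at hd
    obtain ⟨hInR1, hInR2, hInR3, hInR4⟩ := hInR
    rcases hd with h | h | h | h <;> rw [Prod.ext_iff] at h <;>
        obtain ⟨hd1, hd2⟩ := h <;> simp only [hd1, hd2] at hS hInR1 hInR2 hInR3 hInR4
    · left; left; left
      refine ⟨by omega, ?_⟩
      have he : ((((i - 1 : Nat) : Int), ((j : Nat) : Int)) : Int × Int)
          = ((i : Int) + -1, (j : Int) + 0) := by
        rw [Prod.ext_iff]; constructor <;> simp <;> omega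
      exact (hCorr (i - 1) j (by omega) hj).mpr (he ▸ hS)
    · left; left; right
      refine ⟨by omega, ?_⟩
      have he : ((((i + 1 : Nat) : Int), ((j : Nat) : Int)) : Int × Int)
          = ((i : Int) + 1, (j : Int) + 0) := by
        rw [Prod.ext_iff]; constructor <;> simp
      exact (hCorr (i + 1) j (by omega) hj).mpr (he ▸ hS)
    · left; right
      refine ⟨by omega, ?_⟩
      have he : ((((i : Nat) : Int), ((j - 1 : Nat) : Int)) : Int × Int)
          = ((i : Int) + 0, (j : Int) + -1) := by
        rw [Prod.ext_iff]; constructor <;> simp <;> omega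
      exact (hCorr i (j - 1) hi (by omega)).mpr (he ▸ hS)
    · right
      refine ⟨by omega, ?_⟩
      have he : ((((i : Nat) : Int), ((j + 1 : Nat) : Int)) : Int × Int)
          = ((i : Int) + 0, (j : Int) + 1) := by
        rw [Prod.ext_iff]; constructor <;> simp
      exact (hCorr i (j + 1) hi (by omega)).mpr (he ▸ hS)

theorem bget_reached0 (n m : Int) (i j : Nat) :
    bget (reached0 n m) i j
      = if i < n.toNat ∧ j < m.toNat then decide (i = 0) && decide (j = 0)
        else false := by
  unfold reached0
  show (((List.map _ (List.range n.toNat))[i]?.getD [])[j]?).getD false = _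
  by_cases hi : i < n.toNat
  · rw [List.getElem?_map, List.getElem?_range hi]
    by_cases hj : j < m.toNat
    · rw [if_pos ⟨hi, hj⟩]
      simp only [Option.map_some, Option.getD_some, List.getElem?_map,
        List.getElem?_range hj]
    · rw [if_neg (by tauto)]
      simp only [Option.map_some, Option.getD_some]
      rw [List.getElem?_eq_none_iff.mpr (by rw [List.length_map, List.length_range]; omega)]
      rfl
  · rw [if_neg (by tauto)]
    have hnone : ∀ (f : Nat → List Bool), ((List.range n.toNat).map f)[i]? = none := by
      intro f
      rw [List.getElem?_eq_none_iff, List.length_map, List.length_range]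
      omega
    rw [hnone]
    rfl

theorem lists_eq_of_bget (n m : Int) (g1 g2 : List (List Bool))
    (h1 : shapedB n m g1 = true) (h2 : shapedB n m g2 = true)
    (hc : ∀ i j : Nat, i < n.toNat → j < m.toNat → bget g1 i j = bget g2 i j) :
    g1 = g2 := by
  unfold shapedB at h1 h2
  simp [List.all_eq_true] at h1 h2
  obtain ⟨l1, r1⟩ := h1
  obtain ⟨l2, r2⟩ := h2
  apply List.ext_getElem (by omega)
  intro i hi1 hi2
  have hiN : i < n.toNat := by omega
  have hr1 : g1[i].length = m.toNat := r1 _ (g1.getElem_mem hi1)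
  have hr2 : g2[i].length = m.toNat := r2 _ (g2.getElem_mem hi2)
  apply List.ext_getElem (by omega)
  intro j hj1 hj2
  have hjN : j < m.toNat := by omega
  rw [← bget_getElem g1 i j hi1 hj1, ← bget_getElem g2 i j hi2 hj2]
  exact hc i j hiN hjN

theorem shapedB_reached0 (n m : Int) : shapedB n m (reached0 n m) = true := by
  unfold shapedB reached0
  simp [List.all_eq_true]

theorem loopB_eq_loopC (n m : Int) (doom : List (List Int)) (hn : 1 ≤ n) (hm : 1 ≤ m) :
    ∀ (k : Nat) (S : PySem.Set (Int × Int)) (F : List (Int × Int))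
      (reached : List (List Bool)) (t : Int),
      rectFalse n m reached = k →
      shapedB n m reached = true →
      (∀ i j : Nat, i < n.toNat → j < m.toNat →
        (bget reached i j = true ↔ ((((i : Nat) : Int), ((j : Nat) : Int)) : Int × Int) ∈ S)) →
      (∀ c ∈ F, c ∈ S) →
      (∀ c ∈ F, InR n m c) →
      ((n - 1, m - 1) : Int × Int) ∉ S →
      (∀ c : Int × Int, InR n m c → c ∉ S → ∀ d ∈ dirsA,
        ((c.1 + d.1, c.2 + d.2) : Int × Int) ∈ S →
        ((c.1 + d.1, c.2 + d.2) : Int × Int) ∉ F → dget doom c.1 c.2 ≤ t) →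
      loopB n m doom (n - 1, m - 1) S F t = loopC n m doom reached t := by
  intro k
  induction k using Nat.strong_induction_on with
  | _ k IH =>
  intro S F reached t hk hShape hCorr hFS hRect hT hStale
  have hInTg : InR n m ((n - 1, m - 1) : Int × Int) := by
    refine ⟨?_, ?_, ?_, ?_⟩ <;> simp <;> omega
  have e1 : ((((n - 1).toNat : Nat)) : Int) = n - 1 := by omega
  have e2 : ((((m - 1).toNat : Nat)) : Int) = m - 1 := by omega
  have hNEWmem : ∀ (i j : Nat), i < n.toNat → j < m.toNat →
      (bget (sweepC n m doom reached (t + 1)) i j = true ↔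
        ((((i : Nat) : Int), ((j : Nat) : Int)) : Int × Int) ∈ S ∨
        (((((i : Nat) : Int), ((j : Nat) : Int)) : Int × Int) ∉ S
          ∧ t + 1 < dget doom ((i : Nat) : Int) ((j : Nat) : Int)
          ∧ ∃ d ∈ dirsA, ((((i : Nat) : Int) + d.1, ((j : Nat) : Int) + d.2) : Int × Int) ∈ F)) := by
    intro i j hi hj
    have hInc : InR n m ((((i : Nat) : Int), ((j : Nat) : Int)) : Int × Int) := by
      refine ⟨?_, ?_, ?_, ?_⟩ <;> simp <;> omega
    rw [bget_sweepC, if_pos ⟨hi, hj⟩, Bool.or_eq_true]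
    constructor
    · rintro (h | h)
      · exact Or.inl ((hCorr i j hi hj).mp h)
      · obtain ⟨h1, h2, d, hd, hInn, hSn⟩ :=
          (grows_char n m doom reached S (t + 1) i j hi hj hCorr).mp h
        by_cases hF : ((((i : Nat) : Int) + d.1, ((j : Nat) : Int) + d.2) : Int × Int) ∈ F
        · exact Or.inr ⟨h1, h2, d, hd, hF⟩
        · exfalso
          have h3 : dget doom ((i : Nat) : Int) ((j : Nat) : Int) ≤ t :=
            hStale (((i : Nat) : Int), ((j : Nat) : Int)) hInc h1 d hd hSn hF
          omega
    · rintro (h | ⟨h1, h2, d, hd, hF⟩)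
      · exact Or.inl ((hCorr i j hi hj).mpr h)
      · refine Or.inr ((grows_char n m doom reached S (t + 1) i j hi hj hCorr).mpr
          ⟨h1, h2, d, hd, hRect _ hF, hFS _ hF⟩)
  rcases F with _ | ⟨f, fs⟩
  · -- empty frontier: the sweep is a fixpoint and neither side finds the exit
    have hys : bget (sweepC n m doom reached (t + 1)) (n - 1).toNat (m - 1).toNat = false := by
      cases hb : bget (sweepC n m doom reached (t + 1)) (n - 1).toNat (m - 1).toNat with
      | false => rfl
      | true =>
        have h := (hNEWmem (n - 1).toNat (m - 1).toNat (by omega) (by omega)).mp hb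
        rw [e1, e2] at h
        rcases h with h | ⟨h1, h2, d, hd, hF⟩
        · exact absurd h hT
        · simp at hF
    have heq : sweepC n m doom reached (t + 1) = reached := by
      apply lists_eq_of_bget n m _ _ (shapedB_sweepC n m doom reached (t + 1)) hShape
      intro i j hi hj
      cases hb : bget reached i j with
      | true =>
        rw [bget_sweepC, if_pos ⟨hi, hj⟩, hb]
        rfl
      | false =>
        cases hb2 : bget (sweepC n m doom reached (t + 1)) i j with
        | false => rfl
        | true =>
          have h := (hNEWmem i j hi hj).mp hb2
          rcases h with h | ⟨h1, h2, d, hd, hF⟩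
          · rw [(hCorr i j hi hj).mpr h] at hb
            exact hb
          · simp at hF
    rw [loopB, loopC, heq]
    rw [heq] at hys
    rw [if_neg (by rw [hys]; simp), if_pos rfl]
  · -- nonempty frontier
    rw [loopB]
    obtain ⟨cf, cr⟩ := stepB_fold_char n m doom (n - 1, m - 1) t (f :: fs) S [] hT
    by_cases hfl : ((f :: fs).foldl (fun st c => stepB n m doom (n - 1, m - 1) t c.1 c.2 st)
        (S, [], false)).2.2 = true
    · rw [if_pos hfl]
      obtain ⟨hadj, hIn2, hdm⟩ := cf.mp hfl
      have hysT : bget (sweepC n m doom reached (t + 1)) (n - 1).toNat (m - 1).toNat = true := by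
        apply (hNEWmem (n - 1).toNat (m - 1).toNat (by omega) (by omega)).mpr
        rw [e1, e2]
        exact Or.inr ⟨hT, hdm, (adj_symm _ _).mp hadj⟩
      rw [loopC, if_pos hysT]
    · have hfl' : ((f :: fs).foldl (fun st c => stepB n m doom (n - 1, m - 1) t c.1 c.2 st)
          (S, [], false)).2.2 = false := by simpa using hfl
      rw [if_neg hfl]
      obtain ⟨mm1, mm2, mm3⟩ := cr hfl'
      have hysF : bget (sweepC n m doom reached (t + 1)) (n - 1).toNat (m - 1).toNat = false := by
        cases hb : bget (sweepC n m doom reached (t + 1)) (n - 1).toNat (m - 1).toNat with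
        | false => rfl
        | true =>
          have h := (hNEWmem (n - 1).toNat (m - 1).toNat (by omega) (by omega)).mp hb
          rw [e1, e2] at h
          rcases h with h | ⟨h1, h2, d, hd, hF⟩
          · exact absurd h hT
          · exact absurd (cf.mpr ⟨(adj_symm _ _).mpr ⟨d, hd, hF⟩, hInTg, h2⟩) hfl
      rw [loopC, if_neg (by rw [hysF]; simp)]
      by_cases heq : sweepC n m doom reached (t + 1) = reached
      · rw [if_pos heq]
        have hempty : ((f :: fs).foldl (fun st c => stepB n m doom (n - 1, m - 1) t c.1 c.2 st)
            (S, [], false)).2.1 = [] := by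
          rw [List.eq_nil_iff_forall_not_mem]
          intro c hc
          rcases (mm2 c).mp hc with h | hA
          · simp at h
          · obtain ⟨hadjc, hInc, hnS, hnt, hdmc⟩ := hA
            obtain ⟨hb1, hb2, hb3, hb4⟩ := hInc
            have ec1 : (((c.1.toNat : Nat)) : Int) = c.1 := by omega
            have ec2 : (((c.2.toNat : Nat)) : Int) = c.2 := by omega
            have hnew : bget (sweepC n m doom reached (t + 1)) c.1.toNat c.2.toNat = true := by
              apply (hNEWmem c.1.toNat c.2.toNat (by omega) (by omega)).mpr
              rw [ec1, ec2]
              refine Or.inr ⟨?_, hdmc, ?_⟩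
              · intro hx
                exact hnS (by rwa [show ((c.1, c.2) : Int × Int) = c from rfl] at hx)
              · have := (adj_symm _ _).mp hadjc
                exact this
            have hold : bget reached c.1.toNat c.2.toNat = false := by
              cases hb : bget reached c.1.toNat c.2.toNat with
              | false => rfl
              | true =>
                have h5 := (hCorr c.1.toNat c.2.toNat (by omega) (by omega)).mp hb
                rw [ec1, ec2] at h5
                exact absurd (by rwa [show ((c.1, c.2) : Int × Int) = c from rfl] at h5) hnS
            rw [heq] at hnew
            rw [hold] at hnew
            exact Bool.noConfusion hnew
        rw [hempty, loopB]
      · rw [if_neg heq]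
        have hlt : rectFalse n m (sweepC n m doom reached (t + 1)) < k :=
          hk ▸ rectFalse_sweepC_lt n m doom reached (t + 1) hShape heq
        refine IH _ hlt _ _ _ (t + 1) rfl (shapedB_sweepC n m doom reached (t + 1))
          ?_ ?_ ?_ mm3 ?_
        · -- Corr for the new grid / new visited set
          intro i j hi hj
          rw [hNEWmem i j hi hj, mm1 (((i : Nat) : Int), ((j : Nat) : Int))]
          have hInc : InR n m ((((i : Nat) : Int), ((j : Nat) : Int)) : Int × Int) := by
            refine ⟨?_, ?_, ?_, ?_⟩ <;> simp <;> omega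
          constructor
          · rintro (h | ⟨h1, h2, d, hd, hF⟩)
            · exact Or.inl h
            · by_cases hct : ((((i : Nat) : Int), ((j : Nat) : Int)) : Int × Int)
                  = ((n - 1, m - 1) : Int × Int)
              · exfalso
                apply hfl
                apply cf.mpr
                refine ⟨(adj_symm _ _).mpr ⟨d, hd, by rw [← hct]; exact hF⟩, hInTg, ?_⟩
                rw [← hct]
                exact h2
              · exact Or.inr ⟨(adj_symm _ _).mpr ⟨d, hd, hF⟩, hInc, h1, hct, h2⟩
          · rintro (h | ⟨hadjc, hInc2, hnS, hnt, hdmc⟩)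
            · exact Or.inl h
            · exact Or.inr ⟨hnS, hdmc, (adj_symm _ _).mp hadjc⟩
        · -- new frontier is inside the new visited set
          intro c hc
          rcases (mm2 c).mp hc with h | hA
          · simp at h
          · exact (mm1 c).mpr (Or.inr hA)
        · -- new frontier cells are in range
          intro c hc
          rcases (mm2 c).mp hc with h | hA
          · simp at h
          · exact hA.2.1
        · -- staleness at t + 1
          intro c hInc hcnot d hd hnb hnbF
          have hnbS : ((c.1 + d.1, c.2 + d.2) : Int × Int) ∈ S := by
            rcases (mm1 _).mp hnb with h | hA
            · exact h
            · exact absurd ((mm2 _).mpr (Or.inr hA)) hnbF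
          have hcS : c ∉ S := fun h => hcnot ((mm1 c).mpr (Or.inl h))
          have hcA : ¬ AddL n m doom (n - 1, m - 1) t (f :: fs) S c :=
            fun h => hcnot ((mm1 c).mpr (Or.inr h))
          by_cases hFnb : ((c.1 + d.1, c.2 + d.2) : Int × Int) ∈ f :: fs
          · by_cases hct : c = ((n - 1, m - 1) : Int × Int)
            · by_contra hgt
              apply hfl
              apply cf.mpr
              refine ⟨(adj_symm _ _).mpr ⟨d, hd, by rw [← hct]; exact hFnb⟩, hInTg, ?_⟩
              rw [← hct]
              omega
            · by_contra hgt
              exact hcA ⟨(adj_symm _ _).mpr ⟨d, hd, hFnb⟩, hInc, hcS, hct, by omega⟩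
          · have := hStale c hInc hcS d hd hnbS hFnb
            omega

theorem doomsday_escape_equal : ∀ (n m : Int) (doom : List (List Int)),
    Pre_doomsday_escape n m doom →
    doomsday_escape n m doom = doomsday_escape_alt n m doom := by
  intro n m doom hpre
  obtain ⟨hn, hm, -⟩ := hpre
  rw [A_eq_loopB]
  unfold doomsday_escape_alt
  by_cases h11 : n = 1 ∧ m = 1
  · have ht : ((n - 1, m - 1) : Int × Int) = ((0 : Int), (0 : Int)) := by
      rw [Prod.ext_iff]
      constructor <;> simp <;> omega
    rw [if_pos ht, if_pos h11]
  · have htar : ((n - 1, m - 1) : Int × Int) ≠ ((0 : Int), (0 : Int)) := by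
      intro h
      rw [Prod.ext_iff] at h
      obtain ⟨ha, hb⟩ := h
      simp at ha hb
      exact h11 ⟨by omega, by omega⟩
    rw [if_neg htar, if_neg h11]
    apply loopB_eq_loopC n m doom hn hm (rectFalse n m (reached0 n m)) _ _ _ 0 rfl
      (shapedB_reached0 n m) ?_ ?_ ?_ ?_ ?_
    · intro i j hi hj
      rw [bget_reached0, if_pos ⟨hi, hj⟩]
      have hol : PySem.Set.ofList [((0 : Int), (0 : Int))] = [((0 : Int), (0 : Int))] := rfl
      rw [hol]
      simp [Prod.ext_iff]
    · intro c hc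
      exact hc
    · intro c hc
      rw [List.mem_singleton] at hc
      subst hc
      refine ⟨?_, ?_, ?_, ?_⟩ <;> simp <;> omega
    · intro h
      exact htar (by simpa using h)
    · intro c hInc hcS d hd hnb hnF
      exfalso
      apply hnF
      have he : ((c.1 + d.1, c.2 + d.2) : Int × Int) = ((0 : Int), (0 : Int)) := by
        simpa using hnb
      rw [he]
      simp

-- ===== VERDICT (by name: the statement is the Claim_ definition above) =====
theorem doomsday_escape_spec : Claim_equal_doomsday_escape := by
  intro n m doom_time _ hpre
  unfold Spec_doomsday_escape
  exact doomsday_escape_equal n m doom_time hpre
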